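-- pv_equiv track=rewrite | github.com/TEAM-JANDI/algorithm-playground | geunhyung/programmers/표 편집.py | solution
-- ===== SOURCE A (Python) =====
-- def solution(n, k, cmd):
--     linked_list = {i: [i - 1, i + 1] for i in range(n)}
--     linked_list[0] = [None, 1]
--     linked_list[n - 1] = [n - 2, None]
--     stack = []
--     cur = k
--     answer = ['O'] * n
--
--     for string in cmd:
--         if string == 'C':
--             answer[cur] = 'X'
--             prev, nex = linked_list[cur]
--             stack.append([prev, cur, nex])
--             cur = nex if nex != None else prev
--             if prev == None:
--                 linked_list[nex][0] = None
--             elif nex == None: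
--                 linked_list[prev][1] = None
--             else:
--                 linked_list[nex][0] = prev
--                 linked_list[prev][1] = nex
--         elif string == 'Z':
--             prev, now, nex = stack.pop()
--             answer[now] = 'O'
--             if prev == None:
--                 linked_list[nex][0] = now
--             elif nex == None:
--                 linked_list[prev][1] = now
--             else:
--                 linked_list[nex][0] = now
--                 linked_list[prev][1] = now
--         else:
--             direction, num = string.split(' ')
--             if direction == 'U':
--                 for _ in range(int(num)):
--                     if linked_list[cur][0] == None:
--                         break
--                     cur = linked_list[cur][0]
--             else:
--                 for _ in range(int(num)):
--                     if linked_list[cur][1] == None: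
--                         break
--                     cur = linked_list[cur][1]
--
--     return ''.join(answer)
-- ===== SOURCE B (Python) =====
-- def solution(n, k, cmd):
--     # cursor kept as a POSITION in the sorted list of live row numbers,
--     # instead of A's doubly-linked-list dict of prev/next pointers
--     rows = list(range(n))
--     pos = k
--     stack = []
--     for c in cmd:
--         if c == 'C':
--             stack.append(rows.pop(pos))
--             if pos == len(rows):
--                 pos -= 1
--         elif c == 'Z':
--             r = stack.pop()
--             j = 0
--             while j < len(rows) and rows[j] < r:
--                 j += 1
--             rows.insert(j, r)
--             if j <= pos:
--                 pos += 1
--         else: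
--             d, num = c.split(' ')
--             m = int(num)
--             if m > 0:
--                 if d == 'U':
--                     pos = max(pos - m, 0)
--                 else:
--                     pos = min(pos + m, len(rows) - 1)
--     res = ['O'] * n
--     for r in stack:
--         res[r] = 'X'
--     return ''.join(res)
-- ===== Notes on version B (the rewrite author's own statement) =====
-- stated objective: alternative
-- what changed: A simulates the table with a doubly-linked-list dictionary of prev/next pointers plus an answer list updated in place; B keeps the live rows as a sorted Python list with the cursor stored as an index into it, so U/D become clamped index arithmetic, C is a list pop, Z a sorted reinsertion, and the answer is rendered from the deletion stack at the end.
-- outside the precondition, e.g. on solution(1, 0, ['D 3']): A returns 'O', B returns 'O'; on solution(0, 0, ['U 1']): A returns '', B returns ''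
import Mathlib
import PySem

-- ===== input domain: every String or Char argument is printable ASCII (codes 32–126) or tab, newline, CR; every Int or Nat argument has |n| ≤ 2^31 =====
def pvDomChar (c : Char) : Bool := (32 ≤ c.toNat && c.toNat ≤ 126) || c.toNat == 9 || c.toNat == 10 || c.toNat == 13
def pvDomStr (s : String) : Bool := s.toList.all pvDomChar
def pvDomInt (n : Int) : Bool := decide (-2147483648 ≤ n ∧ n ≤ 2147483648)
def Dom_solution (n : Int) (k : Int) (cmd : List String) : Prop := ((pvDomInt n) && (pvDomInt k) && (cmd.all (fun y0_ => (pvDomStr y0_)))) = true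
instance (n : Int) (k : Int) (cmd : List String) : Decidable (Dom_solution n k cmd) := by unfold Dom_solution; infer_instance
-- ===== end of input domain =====

-- B replaces A's doubly-linked-list dictionary of prev/next pointers by a sorted list of the
-- live row numbers with the cursor kept as a POSITION in that list (moves become clamped
-- index arithmetic): an alternative data structure, not claimed faster.

-- ===== PORT A =====
-- state of A's loop: linked-list dict, undo stack, cursor (None possible), answer list
structure AState where
  d : PySem.Dict Int (Option Int × Option Int)
  stack : List (Option Int × Int × Option Int)
  cur : Option Int
  answer : List String
deriving Repr

-- linked_list = {i: [i-1, i+1] for i in range(n)}; linked_list[0] = [None,1]; linked_list[n-1] = [n-2,None]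
def initDict (n : Int) : PySem.Dict Int (Option Int × Option Int) :=
  (((PySem.List.pyRange 0 n 1).foldl
      (fun d i => d.insert i (some (i - 1), some (i + 1))) PySem.Dict.empty).insert
    0 ((none : Option Int), some 1)).insert (n - 1) (some (n - 2), (none : Option Int))

-- the 'U'/'D' loop: 'for _ in range(int(num)): if linked_list[cur][sel] == None: break; cur = …'
-- (none = the Python raised: KeyError on a missing cursor key)
def moveA (d : PySem.Dict Int (Option Int × Option Int)) (up : Bool) : Int → Nat → Option Int
  | c, 0 => some c
  | c, t + 1 =>
    match d.get? c with
    | none => none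
    | some (p, x) =>
      match (if up then p else x) with
      | none => some c
      | some j => moveA d up j t

-- one iteration of A's 'for string in cmd' loop; none = the Python raised on this command
def stepA (st : AState) (s : String) : Option AState :=
  if s = "C" then
    match st.cur with
    | none => none                      -- answer[None]: TypeError
    | some c =>
      match PySem.List.pySet? st.answer c "X" with
      | none => none                    -- answer[cur]: IndexError
      | some ans =>
        match st.d.get? c with
        | none => none                  -- linked_list[cur]: KeyError
        | some (p, x) =>
          let stack := st.stack ++ [(p, c, x)]
          let cur' : Option Int := if x ≠ none then x else p
          match p, x with
          | none, none => none          -- linked_list[None]: KeyError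
          | none, some xx =>
            some ⟨st.d.modify xx (none, none) (fun v => (none, v.2)), stack, cur', ans⟩
          | some pp, none =>
            some ⟨st.d.modify pp (none, none) (fun v => (v.1, none)), stack, cur', ans⟩
          | some pp, some xx =>
            some ⟨(st.d.modify xx (none, none) (fun v => (some pp, v.2))).modify pp
                    (none, none) (fun v => (v.1, some xx)), stack, cur', ans⟩
  else if s = "Z" then
    match PySem.List.pop? st.stack with
    | none => none                      -- stack.pop(): IndexError
    | some ((p, now, x), rest) =>
      match PySem.List.pySet? st.answer now "O" with
      | none => none
      | some ans =>
        match p, x with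
        | none, none => none            -- linked_list[None]: KeyError
        | none, some xx =>
          some ⟨st.d.modify xx (none, none) (fun v => (some now, v.2)), rest, st.cur, ans⟩
        | some pp, none =>
          some ⟨st.d.modify pp (none, none) (fun v => (v.1, some now)), rest, st.cur, ans⟩
        | some pp, some xx =>
          some ⟨(st.d.modify xx (none, none) (fun v => (some now, v.2))).modify pp
                  (none, none) (fun v => (v.1, some now)), rest, st.cur, ans⟩
  else
    match PySem.Str.split? s " " with
    | some [dir, num] =>
      match PySem.Int.ofStr? num with
      | none => none                    -- int(num): ValueError
      | some m =>
        match st.cur with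
        | none => none                  -- linked_list[None]: KeyError
        | some c =>
          match moveA st.d (dir = "U") c m.toNat with
          | none => none
          | some c' => some ⟨st.d, st.stack, some c', st.answer⟩
    | _ => none                         -- unpacking split(' '): ValueError

def runA : AState → List String → Option AState
  | st, [] => some st
  | st, s :: rest =>
    match stepA st s with
    | none => none
    | some st' => runA st' rest

def solution (n : Int) (k : Int) (cmd : List String) : String :=
  match runA ⟨initDict n, [], some k, List.replicate n.toNat "O"⟩ cmd with
  | none => ""                          -- the Python raised; outside Pre_solution
  | some st => PySem.Str.join "" st.answer

-- ===== PORT B =====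
-- B's state: sorted list of live row numbers, cursor position in it, stack of deleted rows
structure BState where
  rows : List Int
  pos : Int
  stack : List Int
deriving Repr

-- 'j = 0; while j < len(rows) and rows[j] < r: j += 1'
def insScan (rows : List Int) (r : Int) (j : Nat) : Nat :=
  if h : j < rows.length then
    if rows[j] < r then insScan rows r (j + 1) else j
  else j
termination_by rows.length - j

-- one iteration of B's loop; none = B's Python raised on this command
def stepB (st : BState) (c : String) : Option BState :=
  if c = "C" then
    match PySem.List.pop? st.rows st.pos with
    | none => none                      -- rows.pop(pos): IndexError
    | some (r, rows') =>
      some ⟨rows', if st.pos = (rows'.length : Int) then st.pos - 1 else st.pos,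
            st.stack ++ [r]⟩
  else if c = "Z" then
    match PySem.List.pop? st.stack with
    | none => none                      -- stack.pop(): IndexError
    | some (r, stk') =>
      let j := insScan st.rows r 0
      some ⟨PySem.List.insert st.rows (j : Int) r,
            if (j : Int) ≤ st.pos then st.pos + 1 else st.pos, stk'⟩
  else
    match PySem.Str.split? c " " with
    | some [d, num] =>
      match PySem.Int.ofStr? num with
      | none => none                    -- int(num): ValueError
      | some m =>
        if 0 < m then
          if d = "U" then some ⟨st.rows, max (st.pos - m) 0, st.stack⟩
          else some ⟨st.rows, min (st.pos + m) ((st.rows.length : Int) - 1), st.stack⟩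
        else some st
    | _ => none                         -- unpacking split(' '): ValueError

def runB : BState → List String → Option BState
  | st, [] => some st
  | st, c :: rest =>
    match stepB st c with
    | none => none
    | some st' => runB st' rest

def solution_alt (n : Int) (k : Int) (cmd : List String) : String :=
  match runB ⟨PySem.List.pyRange 0 n 1, k, []⟩ cmd with
  | none => ""                          -- the Python raised; outside Pre_solution
  | some st =>
    -- res = ['O'] * n; for r in stack: res[r] = 'X'
    match st.stack.foldl (fun acc r => acc.bind (fun res => PySem.List.pySet? res r "X"))
        (some (List.replicate n.toNat "O")) with
    | none => ""
    | some res => PySem.Str.join "" res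

-- ===== PRECONDITION & SPEC =====
-- Format/counting check only (never simulates the edit): every command is 'C', 'Z' or
-- '<word> <int>', no 'Z' pops an empty stack, and no 'C' fires with fewer than 2 live rows.
def validCmds : Int → Int → List String → Bool
  | _, _, [] => true
  | live, stk, s :: rest =>
    if s = "C" then decide (2 ≤ live) && validCmds (live - 1) (stk + 1) rest
    else if s = "Z" then decide (1 ≤ stk) && validCmds (live + 1) (stk - 1) rest
    else
      match PySem.Str.split? s " " with
      | some [_, num] => (PySem.Int.ofStr? num).isSome && validCmds live stk rest
      | _ => false

-- Pre_ admits an empty command list outright and otherwise excludes exactly the inputs on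
-- which A raises (KeyError/IndexError/TypeError/ValueError): degenerate tables (n < 2, where
-- A's sentinel pointers are broken), a cursor outside [0,n), and command lists that are
-- malformed, pop an empty stack, or delete below two live rows; A returns on such an input
-- only when no command ever touches the invalid state, and B agrees there anyway.
def Pre_solution (n : Int) (k : Int) (cmd : List String) : Prop :=
  cmd = [] ∨ (2 ≤ n ∧ 0 ≤ k ∧ k < n ∧ validCmds n 0 cmd = true)
instance (n : Int) (k : Int) (cmd : List String) : Decidable (Pre_solution n k cmd) := by
  unfold Pre_solution; infer_instance

def pvWitness_solution : Int × Int × List String := (3, 1, ["C", "U 1", "Z", "D 2"])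

def Spec_solution (n : Int) (k : Int) (cmd : List String) (out : String) : Prop := out = solution_alt n k cmd
instance (n : Int) (k : Int) (cmd : List String) (out : String) : Decidable (Spec_solution n k cmd out) := by unfold Spec_solution; infer_instance

-- ===== CLAIM (what is proved, stated in full; the proofs are below) =====
def Claim_equal_solution : Prop := ∀ (n : Int) (k : Int) (cmd : List String), Dom_solution n k cmd → Pre_solution n k cmd → Spec_solution n k cmd (solution n k cmd)

-- ===== LEMMAS AND PROOFS =====

-- proof-side views of B's state: value at a position, neighbours around a slot
def gv (rows : List Int) (i : Nat) : Int := rows.getD i 0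
def prevO (rows : List Int) (i : Nat) : Option Int :=
  if i = 0 then none else some (gv rows (i - 1))
def nextO (rows : List Int) (i : Nat) : Option Int := rows[i]?

-- insertion slot of r in rows (number of leading elements < r)
def jIdx (r : Int) : List Int → Nat
  | [] => 0
  | a :: t => if a < r then jIdx r t + 1 else 0

-- proof-side insertion (what PySem.List.insert produces at a Nat slot)
def insAt (rows : List Int) (j : Nat) (r : Int) : List Int :=
  rows.take j ++ r :: rows.drop j

-- A's dict holds exactly the neighbour structure of the sorted live list
def DictInv (rows : List Int) (d : PySem.Dict Int (Option Int × Option Int)) : Prop :=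
  ∀ i : Nat, i < rows.length → d.get? (gv rows i) = some (prevO rows i, nextO rows (i + 1))

-- A's undo stack entries are B's deleted rows, with neighbour data valid for the CURRENT rows
def StackRel (d : PySem.Dict Int (Option Int × Option Int)) :
    List Int → List (Option Int × Int × Option Int) → List Int → Prop
  | _, [], [] => True
  | rows, (p, v, x) :: rA, w :: rB =>
      v = w ∧ v ∉ rows ∧
      p = prevO rows (jIdx v rows) ∧ x = nextO rows (jIdx v rows) ∧
      ¬(p = none ∧ x = none) ∧ d.get? v = some (p, x) ∧
      StackRel d (insAt rows (jIdx v rows) v) rA rB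
  | _, _, _ => False

structure SimRel (n : Int) (a : AState) (b : BState) : Prop where
  sorted : List.Pairwise (· < ·) b.rows
  rbound : ∀ x ∈ b.rows, 0 ≤ x ∧ x < n
  sbound : ∀ x ∈ b.stack, 0 ≤ x ∧ x < n
  count : b.rows.length + b.stack.length = n.toNat
  posv : ∃ pn : Nat, b.pos = (pn : Int) ∧ pn < b.rows.length ∧ a.cur = some (gv b.rows pn)
  anslen : a.answer.length = n.toNat
  ans : ∀ i : Nat, i < n.toNat → a.answer[i]? = some (if (i : Int) ∈ b.stack then "X" else "O")
  stk : StackRel a.d b.rows a.stack.reverse b.stack.reverse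
  dinv : DictInv b.rows a.d

-- ---------- basic facts ----------
lemma rows_lt (rows : List Int) (hs : List.Pairwise (· < ·) rows) (i j : Nat)
    (hij : i < j) (hj : j < rows.length) : gv rows i < gv rows j := by
  have hi : i < rows.length := lt_trans hij hj
  have := List.pairwise_iff_getElem.mp hs i j hi hj hij
  rw [gv, gv, List.getD_eq_getElem rows 0 hi, List.getD_eq_getElem rows 0 hj]
  exact this

lemma rows_inj (rows : List Int) (hs : List.Pairwise (· < ·) rows) (i j : Nat)
    (hi : i < rows.length) (hj : j < rows.length) (h : gv rows i = gv rows j) : i = j := by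
  rcases Nat.lt_trichotomy i j with h | h | h
  · exact absurd h (by have := rows_lt rows hs i j h hj; omega)
  · exact h
  · exact absurd h (by have := rows_lt rows hs j i h hi; omega)

lemma gv_mem (rows : List Int) (i : Nat) (hi : i < rows.length) : gv rows i ∈ rows := by
  rw [gv, List.getD_eq_getElem rows 0 hi]
  exact rows.getElem_mem hi

lemma nextO_lt (rows : List Int) (i : Nat) (hi : i < rows.length) :
    nextO rows i = some (gv rows i) := by
  rw [nextO, List.getElem?_eq_getElem hi, gv, List.getD_eq_getElem rows 0 hi]

lemma nextO_ge (rows : List Int) (i : Nat) (hi : rows.length ≤ i) : nextO rows i = none := by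
  rw [nextO, List.getElem?_eq_none hi]

-- ---------- jIdx characterization ----------
lemma jIdx_le (r : Int) (rows : List Int) : jIdx r rows ≤ rows.length := by
  induction rows with
  | nil => rw [jIdx]; simp
  | cons a t ih =>
    rw [jIdx]
    split_ifs
    · simpa using ih
    · simp

lemma jIdx_lt_elem (r : Int) (rows : List Int) (i : Nat) (h : i < jIdx r rows) :
    gv rows i < r := by
  induction rows generalizing i with
  | nil => simp [jIdx] at h
  | cons a t ih =>
    rw [jIdx] at h
    split_ifs at h with ha
    · cases i with
      | zero => simpa [gv] using ha
      | succ i' =>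
        have : gv t i' < r := ih i' (by omega)
        simpa [gv] using this
    · omega

lemma jIdx_ge_elem (r : Int) (rows : List Int) (hs : List.Pairwise (· < ·) rows)
    (hnm : r ∉ rows) (i : Nat) (h1 : jIdx r rows ≤ i) (h2 : i < rows.length) :
    r < gv rows i := by
  induction rows generalizing i with
  | nil => simp at h2
  | cons a t ih =>
    rw [List.pairwise_cons] at hs
    rw [jIdx] at h1
    split_ifs at h1 with ha
    · cases i with
      | zero => omega
      | succ i' =>
        have : r < gv t i' := ih hs.2 (by simp at hnm; tauto) i' (by omega) (by simpa using h2)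
        simpa [gv] using this
    · have hra : r < a := by
        rcases lt_or_eq_of_le (not_lt.mp ha) with h | h
        · exact h
        · exact absurd h.symm (by simp at hnm; tauto)
      cases i with
      | zero => simpa [gv] using hra
      | succ i' =>
        have hm : gv t i' ∈ t := gv_mem t i' (by simpa using h2)
        have : a < gv t i' := hs.1 _ hm
        have : r < gv t i' := lt_trans hra this
        simpa [gv] using this

lemma jIdx_eq_of (r : Int) (rows : List Int) (p : Nat) (hp : p ≤ rows.length)
    (hlt : ∀ i, i < p → gv rows i < r)
    (hge : p = rows.length ∨ ¬ gv rows p < r) : jIdx r rows = p := by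
  induction rows generalizing p with
  | nil =>
    have : p = 0 := by simpa using hp
    subst this
    rfl
  | cons a t ih =>
    cases p with
    | zero =>
      rcases hge with h | h
      · simp at h
      · rw [jIdx, if_neg (by simpa [gv] using h)]
    | succ q =>
      have ha : a < r := by simpa [gv] using hlt 0 (by omega)
      rw [jIdx, if_pos ha]
      have : jIdx r t = q := by
        apply ih q (by simpa using hp)
        · intro i hi
          have := hlt (i+1) (by omega)
          simpa [gv] using this
        · rcases hge with h | h
          · left; simpa using h
          · right; simpa [gv] using h
      omega

lemma insScan_eq (rows : List Int) (r : Int) : insScan rows r 0 = jIdx r rows := by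
  suffices h : ∀ j : Nat, insScan rows r j = j + jIdx r (rows.drop j) by simpa using h 0
  intro j
  induction hfuel : rows.length - j using Nat.strong_induction_on generalizing j with
  | _ fuel ih =>
    rw [insScan]
    by_cases hj : j < rows.length
    · rw [dif_pos hj]
      have hdrop : rows.drop j = rows[j] :: rows.drop (j+1) := by
        rw [List.getElem_cons_drop]
      by_cases hlt : rows[j] < r
      · rw [if_pos hlt]
        have := ih (rows.length - (j+1)) (by omega) (j+1) rfl
        rw [this, hdrop, jIdx, if_pos hlt]
        omega
      · rw [if_neg hlt, hdrop, jIdx, if_neg hlt]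
        omega
    · rw [dif_neg hj, List.drop_eq_nil_of_le (by omega), jIdx]
      omega

-- ---------- insAt / eraseIdx index views ----------
lemma getElem?_insAt (rows : List Int) (r : Int) (j i : Nat) (hj : j ≤ rows.length) :
    (insAt rows j r)[i]? = if i < j then rows[i]? else if i = j then some r else rows[i-1]? := by
  rw [insAt]
  have hlt : (rows.take j).length = j := by simp; omega
  by_cases h1 : i < j
  · rw [if_pos h1, List.getElem?_append_left (by omega), List.getElem?_take]
    simp [h1]
  · rw [if_neg h1, List.getElem?_append_right (by omega), hlt]
    by_cases h2 : i = j
    · rw [if_pos h2, h2]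
      simp
    · rw [if_neg h2]
      have : i - j = (i - j - 1) + 1 := by omega
      rw [this]
      simp only [List.getElem?_cons_succ, List.getElem?_drop]
      congr 1
      omega

lemma length_insAt (rows : List Int) (r : Int) (j : Nat) (hj : j ≤ rows.length) :
    (insAt rows j r).length = rows.length + 1 := by
  rw [insAt]
  simp only [List.length_append, List.length_take, List.length_cons, List.length_drop]
  omega

lemma gv_insAt (rows : List Int) (r : Int) (j i : Nat) (_hj : j ≤ rows.length) :
    gv (insAt rows j r) i = if i < j then gv rows i else if i = j then r else gv rows (i-1) := by
  have h := getElem?_insAt rows r j i _hj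
  rw [gv, List.getD_eq_getElem?_getD, h]
  split_ifs with h1 h2
  · rw [gv, List.getD_eq_getElem?_getD]
  · rfl
  · rw [gv, List.getD_eq_getElem?_getD]

lemma mem_insAt (rows : List Int) (r : Int) (j : Nat) (_hj : j ≤ rows.length) (x : Int) :
    x ∈ insAt rows j r ↔ x = r ∨ x ∈ rows := by
  rw [insAt]
  constructor
  · intro h
    rcases List.mem_append.mp h with h | h
    · exact Or.inr (List.mem_of_mem_take h)
    · rcases List.mem_cons.mp h with h | h
      · exact Or.inl h
      · exact Or.inr (List.mem_of_mem_drop h)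
  · intro h
    rcases h with h | h
    · exact List.mem_append.mpr (Or.inr (List.mem_cons.mpr (Or.inl h)))
    · conv at h => rw [← List.take_append_drop j rows]
      rcases List.mem_append.mp h with h | h
      · exact List.mem_append.mpr (Or.inl h)
      · exact List.mem_append.mpr (Or.inr (List.mem_cons.mpr (Or.inr h)))

lemma sorted_insAt (rows : List Int) (r : Int) (hs : List.Pairwise (· < ·) rows)
    (hnm : r ∉ rows) : List.Pairwise (· < ·) (insAt rows (jIdx r rows) r) := by
  have hj := jIdx_le r rows
  apply List.pairwise_iff_getElem.mpr
  intro i j hi hj2 hij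
  have hlen := length_insAt rows r (jIdx r rows) hj
  rw [hlen] at hi hj2
  have gi := getElem?_insAt rows r (jIdx r rows) i hj
  have gj := getElem?_insAt rows r (jIdx r rows) j hj
  have ei : (insAt rows (jIdx r rows) r)[i] = gv (insAt rows (jIdx r rows) r) i := by
    rw [gv, List.getD_eq_getElem _ 0 (by rw [hlen]; omega)]
  have ej : (insAt rows (jIdx r rows) r)[j] = gv (insAt rows (jIdx r rows) r) j := by
    rw [gv, List.getD_eq_getElem _ 0 (by rw [hlen]; omega)]
  rw [ei, ej, gv_insAt rows r _ i hj, gv_insAt rows r _ j hj]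
  split_ifs with a1 a2 a3 a4 a5 a6 a7 <;> try omega
  · exact rows_lt rows hs i j hij (by omega)
  · exact jIdx_lt_elem r rows i a1
  · exact lt_of_lt_of_le (jIdx_lt_elem r rows i a1)
      (le_of_lt (jIdx_ge_elem r rows hs hnm (j-1) (by omega) (by omega)))
  · exact jIdx_ge_elem r rows hs hnm (j-1) (by omega) (by omega)
  · exact rows_lt rows hs (i-1) (j-1) (by omega) (by omega)

lemma gv_erase (rows : List Int) (p i : Nat) :
    gv (rows.eraseIdx p) i = if i < p then gv rows i else gv rows (i+1) := by
  rw [gv, gv, gv, List.getD_eq_getElem?_getD, List.getD_eq_getElem?_getD,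
    List.getD_eq_getElem?_getD, List.getElem?_eraseIdx]
  split_ifs <;> rfl

lemma nextO_erase (rows : List Int) (p i : Nat) :
    nextO (rows.eraseIdx p) i = if i < p then nextO rows i else nextO rows (i+1) := by
  rw [nextO, nextO, nextO, List.getElem?_eraseIdx]

lemma insAt_erase (rows : List Int) (p : Nat) (hp : p < rows.length) :
    insAt (rows.eraseIdx p) p (gv rows p) = rows := by
  rw [insAt, List.eraseIdx_eq_take_drop_succ]
  have h1 : List.take p (rows.take p ++ rows.drop (p+1)) = rows.take p := by
    rw [List.take_append_of_le_length (by simp; omega), List.take_take]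
    simp
  have h2 : List.drop p (rows.take p ++ rows.drop (p+1)) = rows.drop (p+1) := by
    apply List.drop_left'
    simp
    omega
  rw [h1, h2]
  have : gv rows p :: rows.drop (p+1) = rows.drop p := by
    rw [gv, List.getD_eq_getElem rows 0 hp, List.getElem_cons_drop]
  rw [this, List.take_append_drop]

lemma not_mem_erase (rows : List Int) (hs : List.Pairwise (· < ·) rows) (p : Nat)
    (hp : p < rows.length) : gv rows p ∉ rows.eraseIdx p := by
  intro hmem
  obtain ⟨i, hi, hgi⟩ := List.mem_iff_getElem.mp hmem
  have hlen : (rows.eraseIdx p).length = rows.length - 1 := by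
    rw [List.length_eraseIdx]; simp [hp]
  have hgv : gv (rows.eraseIdx p) i = gv rows p := by
    rw [gv, List.getD_eq_getElem _ 0 hi, hgi]
  rw [gv_erase] at hgv
  split_ifs at hgv with h
  · have := rows_inj rows hs i p (by omega) hp hgv
    omega
  · have := rows_inj rows hs (i+1) p (by omega) hp hgv
    omega

lemma jIdx_erase (rows : List Int) (hs : List.Pairwise (· < ·) rows) (p : Nat)
    (hp : p < rows.length) : jIdx (gv rows p) (rows.eraseIdx p) = p := by
  have hlen : (rows.eraseIdx p).length = rows.length - 1 := by
    rw [List.length_eraseIdx]; simp [hp]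
  apply jIdx_eq_of
  · omega
  · intro i hi
    rw [gv_erase, if_pos hi]
    exact rows_lt rows hs i p hi hp
  · by_cases h : p = rows.length - 1
    · left; omega
    · right
      rw [gv_erase, if_neg (by omega)]
      have := rows_lt rows hs p (p+1) (by omega) (by omega)
      omega

-- ---------- dict helpers ----------
lemma get?_modify (d : PySem.Dict Int (Option Int × Option Int)) (k : Int)
    (dflt : Option Int × Option Int) (f : Option Int × Option Int → Option Int × Option Int)
    (k' : Int) :
    (d.modify k dflt f).get? k' = if k' = k then some (f (d.getD k dflt)) else d.get? k' := by
  show (d.insert k (f (d.getD k dflt))).get? k' = _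
  rw [PySem.Dict.get?_insert]

lemma getD_of_get? (d : PySem.Dict Int (Option Int × Option Int)) (k : Int)
    (v dflt : Option Int × Option Int) (h : d.get? k = some v) : d.getD k dflt = v := by
  rw [PySem.Dict.getD_eq_get?_getD, h]; rfl

lemma get?_foldl_insert (l : List Int) (d : PySem.Dict Int (Option Int × Option Int))
    (f : Int → Option Int × Option Int) (j : Int) :
    (l.foldl (fun d i => d.insert i (f i)) d).get? j =
      if j ∈ l then some (f j) else d.get? j := by
  induction l generalizing d with
  | nil => simp
  | cons i l ih =>
    rw [List.foldl_cons, ih]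
    by_cases hm : j ∈ l
    · simp [hm]
    · rw [if_neg hm, PySem.Dict.get?_insert]
      by_cases he : j = i <;> simp [he, hm]

lemma initDict_get? (n : Int) (hn : 2 ≤ n) (i : Nat) (hi : (i : Int) < n) :
    (initDict n).get? (i : Int) =
      some ((if (i : Int) = 0 then none else some ((i : Int) - 1)),
            (if (i : Int) = n - 1 then none else some ((i : Int) + 1))) := by
  unfold initDict
  rw [PySem.Dict.get?_insert]
  by_cases h1 : (i : Int) = n - 1
  · rw [if_pos h1, if_pos h1, if_neg (by omega)]
    have h2 : n - 2 = (i : Int) - 1 := by omega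
    rw [h2]
  · rw [if_neg h1, PySem.Dict.get?_insert]
    by_cases h0 : (i : Int) = 0
    · rw [if_pos h0, if_pos h0, if_neg h1, h0]
      norm_num
    · rw [if_neg h0, if_neg h0, get?_foldl_insert,
        if_pos (by rw [PySem.List.mem_pyRange_one]; omega), if_neg h1]

-- ---------- StackRel structural facts ----------
lemma stackRel_dead (d : PySem.Dict Int (Option Int × Option Int)) :
    ∀ (rA : List (Option Int × Int × Option Int)) (rows : List Int) (rB : List Int),
      StackRel d rows rA rB → ∀ w ∈ rB, w ∉ rows := by
  intro rA
  induction rA with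
  | nil =>
    intro rows rB h w hw
    cases rB with
    | nil => simp at hw
    | cons _ _ => exact absurd h (by simp [StackRel])
  | cons e rA ih =>
    obtain ⟨p, v, x⟩ := e
    intro rows rB h w hw
    cases rB with
    | nil => exact absurd h (by simp [StackRel])
    | cons w0 rB =>
      obtain ⟨hv, hnm, hp, hx, hpx, hg, htail⟩ := h
      rcases List.mem_cons.mp hw with h' | h'
      · rw [h', ← hv]; exact hnm
      · intro hmem
        exact ih (insAt rows (jIdx v rows) v) rB htail w h'
          ((mem_insAt rows v _ (jIdx_le v rows) w).mpr (Or.inr hmem))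

lemma stackRel_mono_d (d d' : PySem.Dict Int (Option Int × Option Int)) :
    ∀ (rA : List (Option Int × Int × Option Int)) (rows : List Int) (rB : List Int),
      StackRel d rows rA rB → (∀ w ∈ rB, d'.get? w = d.get? w) →
      StackRel d' rows rA rB := by
  intro rA
  induction rA with
  | nil =>
    intro rows rB h hd
    cases rB with
    | nil => trivial
    | cons _ _ => exact absurd h (by simp [StackRel])
  | cons e rA ih =>
    obtain ⟨p, v, x⟩ := e
    intro rows rB h hd
    cases rB with
    | nil => exact absurd h (by simp [StackRel])
    | cons w0 rB =>
      obtain ⟨hv, hnm, hp, hx, hpx, hg, htail⟩ := h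
      refine ⟨hv, hnm, hp, hx, hpx, ?_, ?_⟩
      · rw [hd v (by rw [hv]; exact List.mem_cons_self), hg]
      · exact ih _ rB htail (fun w hw => hd w (List.mem_cons_of_mem _ hw))

-- ---------- the 'U k' / 'D k' commands ----------
lemma moveA_up (rows : List Int) (d : PySem.Dict Int (Option Int × Option Int))
    (hD : DictInv rows d) :
    ∀ (t pn : Nat), pn < rows.length →
      moveA d true (gv rows pn) t = some (gv rows (pn - min t pn)) := by
  intro t
  induction t with
  | zero =>
    intro pn h
    have e : pn - min 0 pn = pn := by omega
    rw [moveA, e]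
  | succ t ih =>
    intro pn hpn
    have hget := hD pn hpn
    show (match d.get? (gv rows pn) with
          | none => none
          | some (p, x) =>
            match (if true then p else x) with
            | none => some (gv rows pn)
            | some j => moveA d true j t) = _
    rw [hget]
    cases pn with
    | zero =>
      show some (gv rows 0) = _
      have e : 0 - min (t+1) 0 = 0 := by omega
      rw [e]
    | succ q =>
      show moveA d true (gv rows q) t = _
      rw [ih q (by omega)]
      have e : q - min t q = (q+1) - min (t+1) (q+1) := by omega
      rw [e]

lemma moveA_down (rows : List Int) (d : PySem.Dict Int (Option Int × Option Int))
    (hD : DictInv rows d) :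
    ∀ (t pn : Nat), pn < rows.length →
      moveA d false (gv rows pn) t = some (gv rows (min (pn + t) (rows.length - 1))) := by
  intro t
  induction t with
  | zero =>
    intro pn h
    have e : min (pn + 0) (rows.length - 1) = pn := by omega
    rw [moveA, e]
  | succ t ih =>
    intro pn hpn
    have hget := hD pn hpn
    show (match d.get? (gv rows pn) with
          | none => none
          | some (p, x) =>
            match (if false then p else x) with
            | none => some (gv rows pn)
            | some j => moveA d false j t) = _
    rw [hget]
    by_cases he : pn + 1 < rows.length
    · rw [nextO_lt rows (pn+1) he]
      show moveA d false (gv rows (pn+1)) t = _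
      rw [ih (pn+1) he]
      have e : min (pn + 1 + t) (rows.length - 1) = min (pn + (t+1)) (rows.length - 1) := by
        omega
      rw [e]
    · rw [nextO_ge rows (pn+1) (by omega)]
      show some (gv rows pn) = _
      have e : min (pn + (t+1)) (rows.length - 1) = pn := by omega
      rw [e]

lemma step_move (n : Int) (a : AState) (b : BState) (s dir num : String) (m : Int)
    (hr : SimRel n a b) (hC : ¬ s = "C") (hZ : ¬ s = "Z")
    (hsplit : PySem.Str.split? s " " = some [dir, num])
    (hnum : PySem.Int.ofStr? num = some m) :
    ∃ a' b', stepA a s = some a' ∧ stepB b s = some b' ∧ SimRel n a' b' ∧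
      b'.stack = b.stack := by
  obtain ⟨hs, hrb, hsb, hcnt, ⟨pn, hb1, hb2, hb3⟩, hal, hans, hst, hD⟩ := hr
  have hpn' : ∃ pn' : Nat,
      pn' = (if dir = "U" then pn - min m.toNat pn
             else min (pn + m.toNat) (b.rows.length - 1)) := ⟨_, rfl⟩
  obtain ⟨pn', hpn'⟩ := hpn'
  have hmv : moveA a.d (decide (dir = "U")) (gv b.rows pn) m.toNat = some (gv b.rows pn') := by
    by_cases hu : dir = "U"
    · rw [hpn', if_pos hu, hu]
      simpa using moveA_up b.rows a.d hD m.toNat pn hb2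
    · rw [hpn', if_neg hu]
      have hdec : decide (dir = "U") = false := by simp [hu]
      rw [hdec]
      exact moveA_down b.rows a.d hD m.toNat pn hb2
  have hpn'lt : pn' < b.rows.length := by
    rw [hpn']; split_ifs <;> omega
  have hA : stepA a s = some ⟨a.d, a.stack, some (gv b.rows pn'), a.answer⟩ := by
    rw [stepA, if_neg hC, if_neg hZ, hsplit]
    show (match PySem.Int.ofStr? num with
          | none => none
          | some mm => match a.cur with
            | none => none
            | some c => match moveA a.d (decide (dir = "U")) c mm.toNat with
              | none => none
              | some c' => some (AState.mk a.d a.stack (some c') a.answer)) = _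
    rw [hnum, hb3]
    show (match moveA a.d (decide (dir = "U")) (gv b.rows pn) m.toNat with
          | none => none
          | some c' => some (AState.mk a.d a.stack (some c') a.answer)) = _
    rw [hmv]
  have hposB : (if 0 < m then (if dir = "U" then max (b.pos - m) 0
        else min (b.pos + m) ((b.rows.length : Int) - 1)) else b.pos) = (pn' : Int) := by
    rw [hb1, hpn']
    by_cases hm : 0 < m
    · have hmc : (m.toNat : Int) = m := by omega
      rw [if_pos hm]
      by_cases hu : dir = "U"
      · rw [if_pos hu, if_pos hu]
        omega
      · rw [if_neg hu, if_neg hu]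
        omega
    · have hmc : m.toNat = 0 := by omega
      rw [if_neg hm, hmc]
      split_ifs <;> omega
  have hB : stepB b s = some ⟨b.rows, (pn' : Int), b.stack⟩ := by
    rw [stepB, if_neg hC, if_neg hZ, hsplit]
    show (match PySem.Int.ofStr? num with
          | none => none
          | some mm =>
            if 0 < mm then
              if dir = "U" then some (BState.mk b.rows (max (b.pos - mm) 0) b.stack)
              else some (BState.mk b.rows (min (b.pos + mm) ((b.rows.length : Int) - 1)) b.stack)
            else some b) = _
    rw [hnum]
    show (if 0 < m then
            if dir = "U" then some (BState.mk b.rows (max (b.pos - m) 0) b.stack)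
            else some (BState.mk b.rows (min (b.pos + m) ((b.rows.length : Int) - 1)) b.stack)
          else some b) = _
    by_cases hm : 0 < m
    · rw [if_pos hm] at hposB ⊢
      by_cases hu : dir = "U"
      · rw [if_pos hu] at hposB ⊢
        rw [hposB]
      · rw [if_neg hu] at hposB ⊢
        rw [hposB]
    · rw [if_neg hm] at hposB ⊢
      rw [← hposB]
  exact ⟨_, _, hA, hB, ⟨hs, hrb, hsb, hcnt, ⟨pn', rfl, hpn'lt, rfl⟩, hal, hans, hst, hD⟩, rfl⟩

-- neighbour views through eraseIdx / insAt
lemma prevO_erase (rows : List Int) (p i : Nat) :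
    prevO (rows.eraseIdx p) i =
      if i = 0 then none else if i ≤ p then some (gv rows (i-1)) else some (gv rows i) := by
  rw [prevO]
  split_ifs with h0 h1
  · rfl
  · rw [gv_erase, if_pos (by omega)]
  · rw [gv_erase, if_neg (by omega), show i - 1 + 1 = i from by omega]

lemma prevO_insAt (rows : List Int) (r : Int) (j i : Nat) (hj : j ≤ rows.length) :
    prevO (insAt rows j r) i =
      if i = 0 then none else if i - 1 < j then some (gv rows (i-1))
      else if i - 1 = j then some r else some (gv rows (i-2)) := by
  rw [prevO]
  split_ifs with h0 h1 h2
  · rfl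
  · rw [gv_insAt rows r j (i-1) hj, if_pos h1]
  · rw [gv_insAt rows r j (i-1) hj, if_neg h1, if_pos h2]
  · rw [gv_insAt rows r j (i-1) hj, if_neg h1, if_neg h2,
      show i - 1 - 1 = i - 2 from by omega]

lemma nextO_insAt (rows : List Int) (r : Int) (j i : Nat) (hj : j ≤ rows.length) :
    nextO (insAt rows j r) i =
      if i < j then nextO rows i else if i = j then some r else nextO rows (i-1) := by
  rw [nextO, getElem?_insAt rows r j i hj]
  rfl

-- ---------- DictInv through a deletion ----------
lemma dictInv_erase_mid (rows : List Int) (d : PySem.Dict Int (Option Int × Option Int))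
    (p : Nat) (hs : List.Pairwise (· < ·) rows) (h0 : 0 < p) (h1 : p + 1 < rows.length)
    (hD : DictInv rows d) :
    DictInv (rows.eraseIdx p)
      ((d.modify (gv rows (p+1)) (none, none) (fun v => (some (gv rows (p-1)), v.2))).modify
        (gv rows (p-1)) (none, none) (fun v => (v.1, some (gv rows (p+1))))) := by
  have hlen : (rows.eraseIdx p).length = rows.length - 1 := by
    rw [List.length_eraseIdx]
    simp [show p < rows.length by omega]
  have hinj : ∀ i j : Nat, i < rows.length → j < rows.length → i ≠ j →
      gv rows i ≠ gv rows j := by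
    intro i j hi hj hne h
    exact hne (rows_inj rows hs i j hi hj h)
  intro i hi
  rw [hlen] at hi
  by_cases hc : i = p - 1
  · subst hc
    have hkey : gv (rows.eraseIdx p) (p-1) = gv rows (p-1) := by
      rw [gv_erase, if_pos (by omega)]
    have hgd : (d.modify (gv rows (p+1)) (none, none)
        (fun v => (some (gv rows (p-1)), v.2))).getD (gv rows (p-1)) (none, none)
        = (prevO rows (p-1), nextO rows p) := by
      apply getD_of_get?
      rw [get?_modify, if_neg (hinj _ _ (by omega) (by omega) (by omega))]
      have := hD (p-1) (by omega)
      rwa [show p - 1 + 1 = p from by omega] at this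
    rw [hkey, get?_modify, if_pos rfl, hgd]
    have e1 : prevO (rows.eraseIdx p) (p-1) = prevO rows (p-1) := by
      rw [prevO_erase, prevO]
      split_ifs with h <;> first | rfl | omega
    have e2 : nextO (rows.eraseIdx p) (p-1+1) = some (gv rows (p+1)) := by
      rw [nextO_erase, if_neg (by omega), show p - 1 + 1 + 1 = p + 1 from by omega,
        nextO_lt rows (p+1) (by omega)]
    rw [e1, e2]
  · by_cases hc2 : i = p
    · have hkey : gv (rows.eraseIdx p) i = gv rows (p+1) := by
        rw [gv_erase, if_neg (by omega), hc2]
      have hgd : d.getD (gv rows (p+1)) (none, none)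
          = (prevO rows (p+1), nextO rows (p+2)) := by
        apply getD_of_get?
        exact hD (p+1) (by omega)
      rw [hkey, get?_modify, if_neg (hinj _ _ (by omega) (by omega) (by omega)),
        get?_modify, if_pos rfl, hgd]
      have e1 : prevO (rows.eraseIdx p) i = some (gv rows (p-1)) := by
        rw [prevO_erase, if_neg (by omega), if_pos (by omega), hc2]
      have e2 : nextO (rows.eraseIdx p) (i+1) = nextO rows (p+2) := by
        rw [nextO_erase, if_neg (by omega), hc2, show p + 1 + 1 = p + 2 from by omega]
      rw [e1, e2]
    · by_cases hc3 : i < p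
      · have hkey : gv (rows.eraseIdx p) i = gv rows i := by
          rw [gv_erase, if_pos hc3]
        rw [hkey, get?_modify, if_neg (hinj _ _ (by omega) (by omega) (by omega)),
          get?_modify, if_neg (hinj _ _ (by omega) (by omega) (by omega))]
        rw [hD i (by omega)]
        have e1 : prevO (rows.eraseIdx p) i = prevO rows i := by
          rw [prevO_erase, prevO]
          split_ifs with h <;> first | rfl | omega
        have e2 : nextO (rows.eraseIdx p) (i+1) = nextO rows (i+1) := by
          rw [nextO_erase, if_pos (by omega)]
        rw [e1, e2]
      · have hkey : gv (rows.eraseIdx p) i = gv rows (i+1) := by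
          rw [gv_erase, if_neg (by omega)]
        rw [hkey, get?_modify, if_neg (hinj _ _ (by omega) (by omega) (by omega)),
          get?_modify, if_neg (hinj _ _ (by omega) (by omega) (by omega))]
        rw [hD (i+1) (by omega)]
        have e1 : prevO (rows.eraseIdx p) i = prevO rows (i+1) := by
          rw [prevO_erase, prevO]
          rw [if_neg (by omega), if_neg (by omega), if_neg (by omega)]
          rfl
        have e2 : nextO (rows.eraseIdx p) (i+1) = nextO rows (i+2) := by
          rw [nextO_erase, if_neg (by omega), show i + 1 + 1 = i + 2 from by omega]
        rw [e1, e2]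

lemma dictInv_erase_head (rows : List Int) (d : PySem.Dict Int (Option Int × Option Int))
    (hs : List.Pairwise (· < ·) rows) (h1 : 1 < rows.length)
    (hD : DictInv rows d) :
    DictInv (rows.eraseIdx 0)
      (d.modify (gv rows 1) (none, none) (fun v => (none, v.2))) := by
  have hlen : (rows.eraseIdx 0).length = rows.length - 1 := by
    rw [List.length_eraseIdx]
    simp [show 0 < rows.length by omega]
  have hinj : ∀ i j : Nat, i < rows.length → j < rows.length → i ≠ j →
      gv rows i ≠ gv rows j := by
    intro i j hi hj hne h
    exact hne (rows_inj rows hs i j hi hj h)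
  intro i hi
  rw [hlen] at hi
  by_cases hc : i = 0
  · subst hc
    have hkey : gv (rows.eraseIdx 0) 0 = gv rows 1 := by
      rw [gv_erase, if_neg (by omega)]
    have hgd : d.getD (gv rows 1) (none, none) = (prevO rows 1, nextO rows 2) := by
      apply getD_of_get?
      exact hD 1 (by omega)
    rw [hkey, get?_modify, if_pos rfl, hgd]
    have e1 : prevO (rows.eraseIdx 0) 0 = none := by rw [prevO_erase, if_pos rfl]
    have e2 : nextO (rows.eraseIdx 0) 1 = nextO rows 2 := by
      rw [nextO_erase, if_neg (by omega)]
    rw [e1, e2]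
  · have hkey : gv (rows.eraseIdx 0) i = gv rows (i+1) := by
      rw [gv_erase, if_neg (by omega)]
    rw [hkey, get?_modify, if_neg (hinj _ _ (by omega) (by omega) (by omega))]
    rw [hD (i+1) (by omega)]
    have e1 : prevO (rows.eraseIdx 0) i = prevO rows (i+1) := by
      rw [prevO_erase, prevO]
      rw [if_neg (by omega), if_neg (by omega), if_neg (by omega)]
      rfl
    have e2 : nextO (rows.eraseIdx 0) (i+1) = nextO rows (i+2) := by
      rw [nextO_erase, if_neg (by omega), show i + 1 + 1 = i + 2 from by omega]
    rw [e1, e2]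

lemma dictInv_erase_last (rows : List Int) (d : PySem.Dict Int (Option Int × Option Int))
    (p : Nat) (hs : List.Pairwise (· < ·) rows) (h0 : 0 < p) (h1 : p + 1 = rows.length)
    (hD : DictInv rows d) :
    DictInv (rows.eraseIdx p)
      (d.modify (gv rows (p-1)) (none, none) (fun v => (v.1, none))) := by
  have hlen : (rows.eraseIdx p).length = rows.length - 1 := by
    rw [List.length_eraseIdx]
    simp [show p < rows.length by omega]
  have hinj : ∀ i j : Nat, i < rows.length → j < rows.length → i ≠ j →
      gv rows i ≠ gv rows j := by
    intro i j hi hj hne h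
    exact hne (rows_inj rows hs i j hi hj h)
  intro i hi
  rw [hlen] at hi
  by_cases hc : i = p - 1
  · subst hc
    have hkey : gv (rows.eraseIdx p) (p-1) = gv rows (p-1) := by
      rw [gv_erase, if_pos (by omega)]
    have hgd : d.getD (gv rows (p-1)) (none, none)
        = (prevO rows (p-1), nextO rows p) := by
      apply getD_of_get?
      have := hD (p-1) (by omega)
      rwa [show p - 1 + 1 = p from by omega] at this
    rw [hkey, get?_modify, if_pos rfl, hgd]
    have e1 : prevO (rows.eraseIdx p) (p-1) = prevO rows (p-1) := by
      rw [prevO_erase, prevO]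
      split_ifs with h <;> first | rfl | omega
    have e2 : nextO (rows.eraseIdx p) (p-1+1) = none := by
      apply nextO_ge
      omega
    rw [e1, e2]
  · have hc3 : i < p - 1 := by omega
    have hkey : gv (rows.eraseIdx p) i = gv rows i := by
      rw [gv_erase, if_pos (by omega)]
    rw [hkey, get?_modify, if_neg (hinj _ _ (by omega) (by omega) (by omega))]
    rw [hD i (by omega)]
    have e1 : prevO (rows.eraseIdx p) i = prevO rows i := by
      rw [prevO_erase, prevO]
      split_ifs with h <;> first | rfl | omega
    have e2 : nextO (rows.eraseIdx p) (i+1) = nextO rows (i+1) := by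
      rw [nextO_erase, if_pos (by omega)]
    rw [e1, e2]

-- ---------- DictInv through a restore ----------
lemma dictInv_restore_mid (rows : List Int) (d : PySem.Dict Int (Option Int × Option Int))
    (v : Int) (j : Nat) (hs : List.Pairwise (· < ·) rows) (hnm : v ∉ rows)
    (hj : j = jIdx v rows) (h0 : 0 < j) (h1 : j < rows.length)
    (hD : DictInv rows d)
    (hv : d.get? v = some (some (gv rows (j-1)), some (gv rows j))) :
    DictInv (insAt rows j v)
      ((d.modify (gv rows j) (none, none) (fun u => (some v, u.2))).modify
        (gv rows (j-1)) (none, none) (fun u => (u.1, some v))) := by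
  have hjle : j ≤ rows.length := by rw [hj]; exact jIdx_le v rows
  have hlen : (insAt rows j v).length = rows.length + 1 := length_insAt rows v j hjle
  have hinj : ∀ i j : Nat, i < rows.length → j < rows.length → i ≠ j →
      gv rows i ≠ gv rows j := by
    intro i j hi hj hne h
    exact hne (rows_inj rows hs i j hi hj h)
  have hvne : ∀ t : Nat, t < rows.length → v ≠ gv rows t := by
    intro t ht h
    exact hnm (h ▸ gv_mem rows t ht)
  intro i hi
  rw [hlen] at hi
  by_cases hc1 : i < j
  · by_cases hc2 : i = j - 1
    · have hkey : gv (insAt rows j v) i = gv rows (j-1) := by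
        rw [gv_insAt rows v j i hjle, if_pos hc1, hc2]
      have hgd : (d.modify (gv rows j) (none, none)
          (fun u => (some v, u.2))).getD (gv rows (j-1)) (none, none)
          = (prevO rows (j-1), nextO rows j) := by
        apply getD_of_get?
        rw [get?_modify, if_neg (hinj _ _ (by omega) (by omega) (by omega))]
        have := hD (j-1) (by omega)
        rwa [show j - 1 + 1 = j from by omega] at this
      rw [hkey, get?_modify, if_pos rfl, hgd]
      have e1 : prevO (insAt rows j v) i = prevO rows (j-1) := by
        rw [prevO_insAt rows v j i hjle, prevO, hc2]
        split_ifs with a1 a2 <;> first | rfl | omega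
      have e2 : nextO (insAt rows j v) (i+1) = some v := by
        rw [nextO_insAt rows v j (i+1) hjle, if_neg (by omega), if_pos (by omega)]
      rw [e1, e2]
    · have hkey : gv (insAt rows j v) i = gv rows i := by
        rw [gv_insAt rows v j i hjle, if_pos hc1]
      rw [hkey, get?_modify, if_neg (hinj _ _ (by omega) (by omega) (by omega)),
        get?_modify, if_neg (hinj _ _ (by omega) (by omega) (by omega)), hD i (by omega)]
      have e1 : prevO (insAt rows j v) i = prevO rows i := by
        rw [prevO_insAt rows v j i hjle, prevO]
        split_ifs with a1 a2 <;> first | rfl | omega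
      have e2 : nextO (insAt rows j v) (i+1) = nextO rows (i+1) := by
        rw [nextO_insAt rows v j (i+1) hjle, if_pos (by omega)]
      rw [e1, e2]
  · by_cases hc2 : i = j
    · have hkey : gv (insAt rows j v) i = v := by
        rw [gv_insAt rows v j i hjle, if_neg hc1, if_pos hc2]
      rw [hkey, get?_modify, if_neg (hvne _ (by omega)),
        get?_modify, if_neg (hvne _ (by omega)), hv]
      have e1 : prevO (insAt rows j v) i = some (gv rows (j-1)) := by
        rw [prevO_insAt rows v j i hjle, if_neg (by omega), if_pos (by omega), hc2]
      have e2 : nextO (insAt rows j v) (i+1) = some (gv rows j) := by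
        rw [nextO_insAt rows v j (i+1) hjle, if_neg (by omega), if_neg (by omega), hc2,
          show j + 1 - 1 = j from by omega, nextO_lt rows j (by omega)]
      rw [e1, e2]
    · by_cases hc3 : i = j + 1
      · have hkey : gv (insAt rows j v) i = gv rows j := by
          rw [gv_insAt rows v j i hjle, if_neg hc1, if_neg hc2, hc3,
            show j + 1 - 1 = j from by omega]
        rw [hkey, get?_modify, if_neg (hinj _ _ (by omega) (by omega) (by omega)),
          get?_modify, if_pos rfl]
        rw [getD_of_get? d _ _ _ (hD j (by omega))]
        have e1 : prevO (insAt rows j v) i = some v := by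
          rw [prevO_insAt rows v j i hjle, if_neg (by omega), if_neg (by omega),
            if_pos (by omega)]
        have e2 : nextO (insAt rows j v) (i+1) = nextO rows (j+1) := by
          rw [nextO_insAt rows v j (i+1) hjle, if_neg (by omega), if_neg (by omega), hc3,
            show j + 1 + 1 - 1 = j + 1 from by omega]
        rw [e1, e2]
      · have hkey : gv (insAt rows j v) i = gv rows (i-1) := by
          rw [gv_insAt rows v j i hjle, if_neg hc1, if_neg hc2]
        rw [hkey, get?_modify, if_neg (hinj _ _ (by omega) (by omega) (by omega)),
          get?_modify, if_neg (hinj _ _ (by omega) (by omega) (by omega)),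
          hD (i-1) (by omega)]
        have e1 : prevO (insAt rows j v) i = prevO rows (i-1) := by
          rw [prevO_insAt rows v j i hjle, prevO]
          rw [if_neg (by omega), if_neg (by omega), if_neg (by omega), if_neg (by omega),
            show i - 2 = i - 1 - 1 from by omega]
        have e2 : nextO (insAt rows j v) (i+1) = nextO rows (i-1+1) := by
          rw [nextO_insAt rows v j (i+1) hjle, if_neg (by omega), if_neg (by omega),
            show i + 1 - 1 = i - 1 + 1 from by omega]
        rw [e1, e2]

lemma dictInv_restore_head (rows : List Int) (d : PySem.Dict Int (Option Int × Option Int))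
    (v : Int) (hs : List.Pairwise (· < ·) rows) (hnm : v ∉ rows)
    (hj : 0 = jIdx v rows) (h1 : 0 < rows.length)
    (hD : DictInv rows d)
    (hv : d.get? v = some (none, some (gv rows 0))) :
    DictInv (insAt rows 0 v)
      (d.modify (gv rows 0) (none, none) (fun u => (some v, u.2))) := by
  have hj' : (0 : Nat) = jIdx v rows := hj
  have hjle : (0 : Nat) ≤ rows.length := by omega
  have hlen : (insAt rows 0 v).length = rows.length + 1 := length_insAt rows v 0 hjle
  have hinj : ∀ i j : Nat, i < rows.length → j < rows.length → i ≠ j →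
      gv rows i ≠ gv rows j := by
    intro i j hi hj hne h
    exact hne (rows_inj rows hs i j hi hj h)
  have hvne : ∀ t : Nat, t < rows.length → v ≠ gv rows t := by
    intro t ht h
    exact hnm (h ▸ gv_mem rows t ht)
  intro i hi
  rw [hlen] at hi
  by_cases hc : i = 0
  · have hkey : gv (insAt rows 0 v) i = v := by
      rw [gv_insAt rows v 0 i hjle, if_neg (by omega), if_pos hc]
    rw [hkey, get?_modify, if_neg (hvne _ (by omega)), hv]
    have e1 : prevO (insAt rows 0 v) i = none := by
      rw [prevO_insAt rows v 0 i hjle, if_pos hc]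
    have e2 : nextO (insAt rows 0 v) (i+1) = some (gv rows 0) := by
      rw [nextO_insAt rows v 0 (i+1) hjle, if_neg (by omega), if_neg (by omega), hc,
        nextO_lt rows 0 (by omega)]
    rw [e1, e2]
  · by_cases hc2 : i = 1
    · have hkey : gv (insAt rows 0 v) i = gv rows 0 := by
        rw [gv_insAt rows v 0 i hjle, if_neg (by omega), if_neg hc, hc2]
      rw [hkey, get?_modify, if_pos rfl, getD_of_get? d _ _ _ (hD 0 (by omega))]
      have e1 : prevO (insAt rows 0 v) i = some v := by
        rw [prevO_insAt rows v 0 i hjle, if_neg hc, if_neg (by omega), if_pos (by omega)]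
      have e2 : nextO (insAt rows 0 v) (i+1) = nextO rows 1 := by
        rw [nextO_insAt rows v 0 (i+1) hjle, if_neg (by omega), if_neg (by omega), hc2,
          show 1 + 1 - 1 = 1 from by omega]
      rw [e1, e2]
    · have hkey : gv (insAt rows 0 v) i = gv rows (i-1) := by
        rw [gv_insAt rows v 0 i hjle, if_neg (by omega), if_neg hc]
      rw [hkey, get?_modify, if_neg (hinj _ _ (by omega) (by omega) (by omega)),
        hD (i-1) (by omega)]
      have e1 : prevO (insAt rows 0 v) i = prevO rows (i-1) := by
        rw [prevO_insAt rows v 0 i hjle, prevO]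
        rw [if_neg hc, if_neg (by omega), if_neg (by omega), if_neg (by omega),
          show i - 2 = i - 1 - 1 from by omega]
      have e2 : nextO (insAt rows 0 v) (i+1) = nextO rows (i-1+1) := by
        rw [nextO_insAt rows v 0 (i+1) hjle, if_neg (by omega), if_neg (by omega),
          show i + 1 - 1 = i - 1 + 1 from by omega]
      rw [e1, e2]

lemma dictInv_restore_last (rows : List Int) (d : PySem.Dict Int (Option Int × Option Int))
    (v : Int) (hs : List.Pairwise (· < ·) rows) (hnm : v ∉ rows)
    (hj : rows.length = jIdx v rows) (h1 : 0 < rows.length)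
    (hD : DictInv rows d)
    (hv : d.get? v = some (some (gv rows (rows.length - 1)), none)) :
    DictInv (insAt rows rows.length v)
      (d.modify (gv rows (rows.length - 1)) (none, none) (fun u => (u.1, some v))) := by
  have hjle : rows.length ≤ rows.length := le_refl _
  have hlen : (insAt rows rows.length v).length = rows.length + 1 :=
    length_insAt rows v rows.length hjle
  have hinj : ∀ i j : Nat, i < rows.length → j < rows.length → i ≠ j →
      gv rows i ≠ gv rows j := by
    intro i j hi hj hne h
    exact hne (rows_inj rows hs i j hi hj h)
  have hvne : ∀ t : Nat, t < rows.length → v ≠ gv rows t := by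
    intro t ht h
    exact hnm (h ▸ gv_mem rows t ht)
  intro i hi
  rw [hlen] at hi
  by_cases hc : i = rows.length
  · have hkey : gv (insAt rows rows.length v) i = v := by
      rw [gv_insAt rows v rows.length i hjle, if_neg (by omega), if_pos hc]
    rw [hkey, get?_modify, if_neg (hvne _ (by omega)), hv]
    have e1 : prevO (insAt rows rows.length v) i = some (gv rows (rows.length - 1)) := by
      rw [prevO_insAt rows v rows.length i hjle, if_neg (by omega), if_pos (by omega), hc]
    have e2 : nextO (insAt rows rows.length v) (i+1) = none := by
      rw [nextO_insAt rows v rows.length (i+1) hjle, if_neg (by omega), if_neg (by omega)]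
      apply nextO_ge
      omega
    rw [e1, e2]
  · by_cases hc2 : i = rows.length - 1
    · have hkey : gv (insAt rows rows.length v) i = gv rows (rows.length - 1) := by
        rw [gv_insAt rows v rows.length i hjle, if_pos (by omega), hc2]
      rw [hkey, get?_modify, if_pos rfl]
      have hgd : d.getD (gv rows (rows.length - 1)) (none, none)
          = (prevO rows (rows.length - 1), nextO rows rows.length) := by
        apply getD_of_get?
        have := hD (rows.length - 1) (by omega)
        rwa [show rows.length - 1 + 1 = rows.length from by omega] at this
      rw [hgd]
      have e1 : prevO (insAt rows rows.length v) i = prevO rows (rows.length - 1) := by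
        rw [prevO_insAt rows v rows.length i hjle, prevO, hc2]
        split_ifs with a1 a2 <;> first | rfl | omega
      have e2 : nextO (insAt rows rows.length v) (i+1) = some v := by
        rw [nextO_insAt rows v rows.length (i+1) hjle, if_neg (by omega), if_pos (by omega)]
      rw [e1, e2]
    · have hkey : gv (insAt rows rows.length v) i = gv rows i := by
        rw [gv_insAt rows v rows.length i hjle, if_pos (by omega)]
      rw [hkey, get?_modify, if_neg (hinj _ _ (by omega) (by omega) (by omega)),
        hD i (by omega)]
      have e1 : prevO (insAt rows rows.length v) i = prevO rows i := by
        rw [prevO_insAt rows v rows.length i hjle, prevO]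
        split_ifs with a1 a2 <;> first | rfl | omega
      have e2 : nextO (insAt rows rows.length v) (i+1) = nextO rows (i+1) := by
        rw [nextO_insAt rows v rows.length (i+1) hjle, if_pos (by omega)]
      rw [e1, e2]

-- ---------- one-command reduction forms of the ports ----------
lemma stepA_C (a : AState) (c : Int) (ans : List String) (p x : Option Int)
    (hcur : a.cur = some c) (hset : PySem.List.pySet? a.answer c "X" = some ans)
    (hget : a.d.get? c = some (p, x)) :
    stepA a "C" =
      (match p, x with
       | none, none => none
       | none, some xx => some (AState.mk (a.d.modify xx (none, none) (fun v => (none, v.2)))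
           (a.stack ++ [(p, c, x)]) (if x ≠ none then x else p) ans)
       | some pp, none => some (AState.mk (a.d.modify pp (none, none) (fun v => (v.1, none)))
           (a.stack ++ [(p, c, x)]) (if x ≠ none then x else p) ans)
       | some pp, some xx => some (AState.mk ((a.d.modify xx (none, none) (fun v => (some pp, v.2))).modify pp
           (none, none) (fun v => (v.1, some xx))) (a.stack ++ [(p, c, x)]) (if x ≠ none then x else p) ans)) := by
  simp only [stepA, hcur, hset, hget]
  rw [if_pos trivial]
  cases p <;> cases x <;> rfl

lemma stepA_Z (a : AState) (p : Option Int) (now : Int) (x : Option Int)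
    (rest : List (Option Int × Int × Option Int)) (ans : List String)
    (hpop : PySem.List.pop? a.stack = some ((p, now, x), rest))
    (hset : PySem.List.pySet? a.answer now "O" = some ans) :
    stepA a "Z" =
      (match p, x with
       | none, none => none
       | none, some xx => some (AState.mk (a.d.modify xx (none, none) (fun v => (some now, v.2))) rest a.cur ans)
       | some pp, none => some (AState.mk (a.d.modify pp (none, none) (fun v => (v.1, some now))) rest a.cur ans)
       | some pp, some xx => some (AState.mk ((a.d.modify xx (none, none) (fun v => (some now, v.2))).modify pp
           (none, none) (fun v => (v.1, some now))) rest a.cur ans)) := by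
  simp only [stepA, hpop, hset]
  rw [if_neg (by decide), if_pos trivial]
  cases p <;> cases x <;> rfl

-- the freshly deleted row is not among the previously deleted ones
lemma stackRel_head_not_mem (d : PySem.Dict Int (Option Int × Option Int))
    (rows : List Int) (_p : Option Int) (v : Int) (_x : Option Int)
    (rA : List (Option Int × Int × Option Int)) (rB : List Int)
    (h : StackRel d (insAt rows (jIdx v rows) v) rA rB) : v ∉ rB := by
  intro hmem
  exact stackRel_dead d rA _ rB h v hmem
    ((mem_insAt rows v _ (jIdx_le v rows) v).mpr (Or.inl rfl))

-- ---------- the 'C' command ----------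
lemma step_C (n : Int) (a : AState) (b : BState)
    (hr : SimRel n a b) (hlive2 : 2 ≤ b.rows.length) :
    ∃ a' b', stepA a "C" = some a' ∧ stepB b "C" = some b' ∧ SimRel n a' b' ∧
      b'.stack.length = b.stack.length + 1 := by
  obtain ⟨hs, hrb, hsb, hcnt, ⟨pn, hb1, hb2, hb3⟩, hal, hans, hst, hD⟩ := hr
  have hinj : ∀ i j : Nat, i < b.rows.length → j < b.rows.length → i ≠ j →
      gv b.rows i ≠ gv b.rows j := by
    intro i j hi hj hne h
    exact hne (rows_inj b.rows hs i j hi hj h)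
  have hv0 := hrb (gv b.rows pn) (gv_mem b.rows pn hb2)
  have hgetv : b.rows[pn] = gv b.rows pn := by
    rw [gv, List.getD_eq_getElem b.rows 0 hb2]
  have hpopB : PySem.List.pop? b.rows b.pos = some (gv b.rows pn, b.rows.eraseIdx pn) := by
    rw [hb1, PySem.List.pop?_natCast b.rows pn hb2, hgetv]
  have hlen_er : (b.rows.eraseIdx pn).length = b.rows.length - 1 := by
    rw [List.length_eraseIdx]
    simp [hb2]
  have hvtn : (gv b.rows pn).toNat < n.toNat := by omega
  have hvcast : (((gv b.rows pn).toNat : Nat) : Int) = gv b.rows pn :=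
    Int.toNat_of_nonneg hv0.1
  have hsetA : PySem.List.pySet? a.answer (gv b.rows pn) "X"
      = some (a.answer.set (gv b.rows pn).toNat "X") := by
    have := PySem.List.pySet?_natCast a.answer (gv b.rows pn).toNat "X" (by omega)
    rwa [hvcast] at this
  have hget := hD pn hb2
  -- the new answer invariant, shared by all three cases
  have hans' : ∀ i : Nat, i < n.toNat →
      (a.answer.set (gv b.rows pn).toNat "X")[i]? =
        some (if (i : Int) ∈ b.stack ++ [gv b.rows pn] then "X" else "O") := by
    intro i hi
    rw [List.getElem?_set]
    by_cases hiv : (gv b.rows pn).toNat = i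
    · rw [if_pos hiv, if_pos (by omega),
        if_pos (List.mem_append.mpr (Or.inr (by
          have : (i : Int) = gv b.rows pn := by omega
          rw [this]
          exact List.mem_singleton.mpr rfl)))]
    · rw [if_neg hiv, hans i hi]
      congr 1
      by_cases hm : (i : Int) ∈ b.stack
      · rw [if_pos hm, if_pos (List.mem_append.mpr (Or.inl hm))]
      · rw [if_neg hm, if_neg (by
          intro hc
          rcases List.mem_append.mp hc with h | h
          · exact hm h
          · exact hiv (by have := List.mem_singleton.mp h; omega))]
  have hdead := stackRel_dead a.d a.stack.reverse b.rows b.stack.reverse hst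
  have hrevB : (b.stack ++ [gv b.rows pn]).reverse = gv b.rows pn :: b.stack.reverse := by
    simp
  have hrevA : ∀ e : Option Int × Int × Option Int,
      (a.stack ++ [e]).reverse = e :: a.stack.reverse := by
    intro e
    simp
  -- head facts of the new StackRel, shared
  have hnm' : gv b.rows pn ∉ b.rows.eraseIdx pn := not_mem_erase b.rows hs pn hb2
  have hjer : jIdx (gv b.rows pn) (b.rows.eraseIdx pn) = pn := jIdx_erase b.rows hs pn hb2
  have hper : prevO (b.rows.eraseIdx pn) pn = prevO b.rows pn := by
    rw [prevO_erase, prevO]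
    split_ifs with h <;> first | rfl | omega
  have hxer : nextO (b.rows.eraseIdx pn) pn = nextO b.rows (pn+1) := by
    rw [nextO_erase, if_neg (by omega)]
  have hinsAt : insAt (b.rows.eraseIdx pn) pn (gv b.rows pn) = b.rows :=
    insAt_erase b.rows pn hb2
  by_cases hxc : pn + 1 < b.rows.length
  · -- the deleted row has a next live row: the cursor moves to it
    have hx : nextO b.rows (pn+1) = some (gv b.rows (pn+1)) := nextO_lt b.rows (pn+1) hxc
    by_cases hpc : pn = 0
    · -- no previous live row
      subst hpc
      have hp : prevO b.rows 0 = none := by rw [prevO, if_pos rfl]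
      rw [hp, hx] at hget
      have hA := stepA_C a (gv b.rows 0) (a.answer.set (gv b.rows 0).toNat "X")
        none (some (gv b.rows 1)) (by rw [hb3]) hsetA hget
      have hposB : (if b.pos = ((b.rows.eraseIdx 0).length : Int) then b.pos - 1 else b.pos)
          = ((0 : Nat) : Int) := by
        rw [hb1, if_neg (by rw [hlen_er]; intro h; omega)]
      refine ⟨AState.mk (a.d.modify (gv b.rows 1) (none, none) (fun u => (none, u.2)))
          (a.stack ++ [(none, gv b.rows 0, some (gv b.rows 1))])
          (some (gv b.rows 1)) (a.answer.set (gv b.rows 0).toNat "X"),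
        BState.mk (b.rows.eraseIdx 0) ((0 : Nat) : Int) (b.stack ++ [gv b.rows 0]),
        ?_, ?_, ?_, by simp⟩
      · exact hA.trans rfl
      · rw [stepB, if_pos rfl]
        show (match PySem.List.pop? b.rows b.pos with
              | none => none
              | some (r, rows') => some (BState.mk rows'
                  (if b.pos = (rows'.length : Int) then b.pos - 1 else b.pos)
                  (b.stack ++ [r]))) = _
        rw [hpopB]
        show some (BState.mk (b.rows.eraseIdx 0)
            (if b.pos = ((b.rows.eraseIdx 0).length : Int) then b.pos - 1 else b.pos)
            (b.stack ++ [gv b.rows 0])) = _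
        rw [hposB]
      · refine ⟨List.Pairwise.sublist (List.eraseIdx_sublist b.rows 0) hs,
          fun y hy => hrb y (List.mem_of_mem_eraseIdx hy),
          fun y hy => ?_,
          by simp only [List.length_append, List.length_cons, List.length_nil, hlen_er]; omega,
          ⟨0, rfl, by show 0 < (b.rows.eraseIdx 0).length; rw [hlen_er]; omega,
            by rw [gv_erase, if_neg (by omega)]⟩,
          by simp [hal],
          hans', ?_, ?_⟩
        · rcases List.mem_append.mp hy with h | h
          · exact hsb y h
          · rw [List.mem_singleton.mp h]; exact hv0
        · show StackRel _ _ ((a.stack ++ _).reverse) ((b.stack ++ _).reverse)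
          rw [hrevA, hrevB]
          refine ⟨rfl, hnm', by rw [hjer, hper, hp], by rw [hjer, hxer, hx], by simp, ?_, ?_⟩
          · rw [get?_modify, if_neg (hinj 0 1 (by omega) (by omega) (by omega)), hget]
          · rw [hjer, hinsAt]
            apply stackRel_mono_d a.d _ _ _ _ hst
            intro w hw
            rw [get?_modify, if_neg (by
              intro h
              exact hdead w hw (h ▸ gv_mem b.rows 1 (by omega)))]
        · exact dictInv_erase_head b.rows a.d hs (by omega) hD
    · -- both neighbours exist
      have hp : prevO b.rows pn = some (gv b.rows (pn-1)) := by
        rw [prevO, if_neg hpc]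
      rw [hp, hx] at hget
      have hA := stepA_C a (gv b.rows pn) (a.answer.set (gv b.rows pn).toNat "X")
        (some (gv b.rows (pn-1))) (some (gv b.rows (pn+1))) (by rw [hb3]) hsetA hget
      have hposB : (if b.pos = ((b.rows.eraseIdx pn).length : Int) then b.pos - 1 else b.pos)
          = ((pn : Nat) : Int) := by
        rw [hb1, if_neg (by rw [hlen_er]; intro h; omega)]
      refine ⟨AState.mk
          ((a.d.modify (gv b.rows (pn+1)) (none, none)
              (fun u => (some (gv b.rows (pn-1)), u.2))).modify
            (gv b.rows (pn-1)) (none, none) (fun u => (u.1, some (gv b.rows (pn+1)))))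
          (a.stack ++ [(some (gv b.rows (pn-1)), gv b.rows pn, some (gv b.rows (pn+1)))])
          (some (gv b.rows (pn+1))) (a.answer.set (gv b.rows pn).toNat "X"),
        BState.mk (b.rows.eraseIdx pn) ((pn : Nat) : Int) (b.stack ++ [gv b.rows pn]),
        ?_, ?_, ?_, by simp⟩
      · exact hA.trans rfl
      · rw [stepB, if_pos rfl]
        show (match PySem.List.pop? b.rows b.pos with
              | none => none
              | some (r, rows') => some (BState.mk rows'
                  (if b.pos = (rows'.length : Int) then b.pos - 1 else b.pos)
                  (b.stack ++ [r]))) = _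
        rw [hpopB]
        show some (BState.mk (b.rows.eraseIdx pn)
            (if b.pos = ((b.rows.eraseIdx pn).length : Int) then b.pos - 1 else b.pos)
            (b.stack ++ [gv b.rows pn])) = _
        rw [hposB]
      · refine ⟨List.Pairwise.sublist (List.eraseIdx_sublist b.rows pn) hs,
          fun y hy => hrb y (List.mem_of_mem_eraseIdx hy),
          fun y hy => ?_,
          by simp only [List.length_append, List.length_cons, List.length_nil, hlen_er]; omega,
          ⟨pn, rfl, by show pn < (b.rows.eraseIdx pn).length; rw [hlen_er]; omega,
            by rw [gv_erase, if_neg (by omega)]⟩,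
          by simp [hal],
          hans', ?_, ?_⟩
        · rcases List.mem_append.mp hy with h | h
          · exact hsb y h
          · rw [List.mem_singleton.mp h]; exact hv0
        · show StackRel _ _ ((a.stack ++ _).reverse) ((b.stack ++ _).reverse)
          rw [hrevA, hrevB]
          refine ⟨rfl, hnm', by rw [hjer, hper, hp], by rw [hjer, hxer, hx], by simp, ?_, ?_⟩
          · rw [get?_modify, if_neg (hinj pn (pn-1) (by omega) (by omega) (by omega)),
              get?_modify, if_neg (hinj pn (pn+1) (by omega) (by omega) (by omega)), hget]
          · rw [hjer, hinsAt]
            apply stackRel_mono_d a.d _ _ _ _ hst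
            intro w hw
            rw [get?_modify, if_neg (by
                intro h
                exact hdead w hw (h ▸ gv_mem b.rows (pn-1) (by omega))),
              get?_modify, if_neg (by
                intro h
                exact hdead w hw (h ▸ gv_mem b.rows (pn+1) (by omega)))]
        · exact dictInv_erase_mid b.rows a.d pn hs (by omega) (by omega) hD
  · -- the deleted row is the last live one: the cursor moves to the previous live row
    have hx : nextO b.rows (pn+1) = none := nextO_ge b.rows (pn+1) (by omega)
    have hpc : 0 < pn := by omega
    have hp : prevO b.rows pn = some (gv b.rows (pn-1)) := by
      rw [prevO, if_neg (by omega)]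
    rw [hp, hx] at hget
    have hA := stepA_C a (gv b.rows pn) (a.answer.set (gv b.rows pn).toNat "X")
      (some (gv b.rows (pn-1))) none (by rw [hb3]) hsetA hget
    have hposB : (if b.pos = ((b.rows.eraseIdx pn).length : Int) then b.pos - 1 else b.pos)
        = ((pn - 1 : Nat) : Int) := by
      rw [hb1, if_pos (by rw [hlen_er]; omega)]
      omega
    refine ⟨AState.mk
        (a.d.modify (gv b.rows (pn-1)) (none, none) (fun u => (u.1, none)))
        (a.stack ++ [(some (gv b.rows (pn-1)), gv b.rows pn, none)])
        (some (gv b.rows (pn-1))) (a.answer.set (gv b.rows pn).toNat "X"),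
      BState.mk (b.rows.eraseIdx pn) ((pn - 1 : Nat) : Int) (b.stack ++ [gv b.rows pn]),
      ?_, ?_, ?_, by simp⟩
    · exact hA.trans rfl
    · rw [stepB, if_pos rfl]
      show (match PySem.List.pop? b.rows b.pos with
            | none => none
            | some (r, rows') => some (BState.mk rows'
                (if b.pos = (rows'.length : Int) then b.pos - 1 else b.pos)
                (b.stack ++ [r]))) = _
      rw [hpopB]
      show some (BState.mk (b.rows.eraseIdx pn)
          (if b.pos = ((b.rows.eraseIdx pn).length : Int) then b.pos - 1 else b.pos)
          (b.stack ++ [gv b.rows pn])) = _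
      rw [hposB]
    · refine ⟨List.Pairwise.sublist (List.eraseIdx_sublist b.rows pn) hs,
        fun y hy => hrb y (List.mem_of_mem_eraseIdx hy),
        fun y hy => ?_,
        by simp only [List.length_append, List.length_cons, List.length_nil, hlen_er]; omega,
        ⟨pn - 1, rfl, by show pn - 1 < (b.rows.eraseIdx pn).length; rw [hlen_er]; omega,
          by rw [gv_erase, if_pos (by omega)]⟩,
        by simp [hal],
        hans', ?_, ?_⟩
      · rcases List.mem_append.mp hy with h | h
        · exact hsb y h
        · rw [List.mem_singleton.mp h]; exact hv0
      · show StackRel _ _ ((a.stack ++ _).reverse) ((b.stack ++ _).reverse)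
        rw [hrevA, hrevB]
        refine ⟨rfl, hnm', by rw [hjer, hper, hp], by rw [hjer, hxer, hx], by simp, ?_, ?_⟩
        · rw [get?_modify, if_neg (hinj pn (pn-1) (by omega) (by omega) (by omega)), hget]
        · rw [hjer, hinsAt]
          apply stackRel_mono_d a.d _ _ _ _ hst
          intro w hw
          rw [get?_modify, if_neg (by
            intro h
            exact hdead w hw (h ▸ gv_mem b.rows (pn-1) (by omega)))]
      · exact dictInv_erase_last b.rows a.d pn hs (by omega) (by omega) hD

-- ---------- the 'Z' command ----------
lemma step_Z (n : Int) (a : AState) (b : BState)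
    (hr : SimRel n a b) (hstk : b.stack ≠ []) :
    ∃ a' b', stepA a "Z" = some a' ∧ stepB b "Z" = some b' ∧ SimRel n a' b' ∧
      b'.stack.length + 1 = b.stack.length := by
  obtain ⟨hs, hrb, hsb, hcnt, ⟨pn, hb1, hb2, hb3⟩, hal, hans, hst, hD⟩ := hr
  cases hrB : b.stack.reverse with
  | nil => exact absurd (by rw [← List.reverse_reverse b.stack, hrB, List.reverse_nil]) hstk
  | cons w rB =>
    cases hrA : a.stack.reverse with
    | nil =>
      rw [hrA, hrB] at hst
      exact absurd hst (by simp [StackRel])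
    | cons e rA =>
      obtain ⟨p, v, x⟩ := e
      rw [hrA, hrB] at hst
      obtain ⟨hvw, hnm, hpEq, hxEq, hpx, hvd, htail⟩ := hst
      subst hvw
      have hjle : jIdx v b.rows ≤ b.rows.length := jIdx_le v b.rows
      have hstA : a.stack = rA.reverse ++ [(p, v, x)] := by
        rw [← List.reverse_reverse a.stack, hrA, List.reverse_cons]
      have hstB : b.stack = rB.reverse ++ [v] := by
        rw [← List.reverse_reverse b.stack, hrB, List.reverse_cons]
      have hpopA : PySem.List.pop? a.stack = some ((p, v, x), rA.reverse) := by
        rw [hstA]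
        exact PySem.List.pop?_last rA.reverse (p, v, x)
      have hpopB : PySem.List.pop? b.stack = some (v, rB.reverse) := by
        rw [hstB]
        exact PySem.List.pop?_last rB.reverse v
      have hv0 := hsb v (by rw [hstB]; exact List.mem_append.mpr (Or.inr List.mem_cons_self))
      have hvcast : ((v.toNat : Nat) : Int) = v := Int.toNat_of_nonneg hv0.1
      have hsetA : PySem.List.pySet? a.answer v "O" = some (a.answer.set v.toNat "O") := by
        have := PySem.List.pySet?_natCast a.answer v.toNat "O" (by omega)
        rwa [hvcast] at this
      have hscan : insScan b.rows v 0 = jIdx v b.rows := insScan_eq b.rows v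
      have hins : PySem.List.insert b.rows ((jIdx v b.rows : Nat) : Int) v
          = insAt b.rows (jIdx v b.rows) v := by
        rw [PySem.List.insert_natCast b.rows (jIdx v b.rows) v hjle]
        rfl
      have hposB : (if ((jIdx v b.rows : Nat) : Int) ≤ b.pos then b.pos + 1 else b.pos)
          = (((if jIdx v b.rows ≤ pn then pn + 1 else pn) : Nat) : Int) := by
        rw [hb1]
        by_cases hc : jIdx v b.rows ≤ pn
        · rw [if_pos (by exact_mod_cast hc), if_pos hc]
          push_cast
          ring
        · rw [if_neg (by exact_mod_cast hc), if_neg hc]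
      have hB : stepB b "Z" = some ⟨insAt b.rows (jIdx v b.rows) v,
          (((if jIdx v b.rows ≤ pn then pn + 1 else pn) : Nat) : Int), rB.reverse⟩ := by
        rw [stepB, if_neg (by decide), if_pos rfl]
        show (match PySem.List.pop? b.stack with
              | none => none
              | some (r, stk') =>
                some (BState.mk (PySem.List.insert b.rows ((insScan b.rows r 0 : Nat) : Int) r)
                  (if ((insScan b.rows r 0 : Nat) : Int) ≤ b.pos then b.pos + 1 else b.pos)
                  stk')) = _
        rw [hpopB]
        show some (BState.mk (PySem.List.insert b.rows ((insScan b.rows v 0 : Nat) : Int) v)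
            (if ((insScan b.rows v 0 : Nat) : Int) ≤ b.pos then b.pos + 1 else b.pos)
            rB.reverse) = _
        rw [hscan, hins, hposB]
      have hlenIns : (insAt b.rows (jIdx v b.rows) v).length = b.rows.length + 1 :=
        length_insAt b.rows v (jIdx v b.rows) hjle
      have hsort' := sorted_insAt b.rows v hs hnm
      have hrb' : ∀ y ∈ insAt b.rows (jIdx v b.rows) v, 0 ≤ y ∧ y < n := by
        intro y hy
        rcases (mem_insAt b.rows v _ hjle y).mp hy with h | h
        · rw [h]; exact hv0
        · exact hrb y h
      have hsb' : ∀ y ∈ rB.reverse, 0 ≤ y ∧ y < n := by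
        intro y hy
        exact hsb y (by rw [hstB]; exact List.mem_append.mpr (Or.inl hy))
      have hcnt' : (insAt b.rows (jIdx v b.rows) v).length + rB.reverse.length = n.toNat := by
        have : b.stack.length = rB.reverse.length + 1 := by
          rw [hstB, List.length_append, List.length_cons]
          rfl
        rw [hlenIns]
        omega
      have hcur : gv (insAt b.rows (jIdx v b.rows) v) (if jIdx v b.rows ≤ pn then pn + 1 else pn)
          = gv b.rows pn := by
        by_cases hc : jIdx v b.rows ≤ pn
        · rw [if_pos hc, gv_insAt _ _ _ _ hjle, if_neg (by omega), if_neg (by omega)]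
          rfl
        · rw [if_neg hc, gv_insAt _ _ _ _ hjle, if_pos (by omega)]
      have hposv' : (if jIdx v b.rows ≤ pn then pn + 1 else pn) < (insAt b.rows (jIdx v b.rows) v).length := by
        rw [hlenIns]
        split_ifs <;> omega
      have hvnotin : v ∉ rB := stackRel_head_not_mem a.d b.rows p v x rA rB htail
      have hans' : ∀ i : Nat, i < n.toNat →
          (a.answer.set v.toNat "O")[i]? = some (if (i : Int) ∈ rB.reverse then "X" else "O") := by
        intro i hi
        rw [List.getElem?_set]
        by_cases hiv : v.toNat = i
        · rw [if_pos hiv, if_pos (by omega), if_neg (by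
            intro hc
            have he : (i : Int) = v := by omega
            rw [he, List.mem_reverse] at hc
            exact hvnotin hc)]
        · rw [if_neg hiv, hans i hi]
          congr 1
          rw [hstB]
          by_cases hm : (i : Int) ∈ rB.reverse
          · rw [if_pos (List.mem_append.mpr (Or.inl hm)), if_pos hm]
          · rw [if_neg (by
              intro hc
              rcases List.mem_append.mp hc with h | h
              · exact hm h
              · exact hiv (by have := List.mem_singleton.mp h; omega)), if_neg hm]
      have hdead' := stackRel_dead a.d rA (insAt b.rows (jIdx v b.rows) v) rB htail
      have hmono : ∀ (d' : PySem.Dict Int (Option Int × Option Int)),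
          (∀ w ∈ rB, d'.get? w = a.d.get? w) →
          StackRel d' (insAt b.rows (jIdx v b.rows) v) rA rB := fun d' h =>
        stackRel_mono_d a.d d' rA _ rB htail h
      have hkeymem : ∀ t : Nat, t < b.rows.length →
          gv b.rows t ∈ insAt b.rows (jIdx v b.rows) v := by
        intro t ht
        exact (mem_insAt b.rows v _ hjle _).mpr (Or.inr (gv_mem b.rows t ht))
      by_cases hj0 : jIdx v b.rows = 0
      · -- restored row goes below every live row
        have hp : p = none := by
          rw [hpEq, hj0, prevO, if_pos rfl]
        have hlen0 : 0 < b.rows.length := by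
          by_contra hc
          exact hpx ⟨hp, by rw [hxEq, nextO_ge b.rows _ (by omega)]⟩
        have hx : x = some (gv b.rows 0) := by
          rw [hxEq, hj0, nextO_lt b.rows 0 hlen0]
        rw [hp, hx] at hpopA hvd
        have hA := stepA_Z a none v (some (gv b.rows 0)) rA.reverse
          (a.answer.set v.toNat "O") hpopA hsetA
        refine ⟨AState.mk (a.d.modify (gv b.rows 0) (none, none) (fun u => (some v, u.2)))
            rA.reverse a.cur (a.answer.set v.toNat "O"),
          BState.mk (insAt b.rows (jIdx v b.rows) v)
            (((if jIdx v b.rows ≤ pn then pn + 1 else pn) : Nat) : Int) rB.reverse,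
          hA.trans rfl, hB, ?_, by
            show rB.reverse.length + 1 = b.stack.length
            rw [hstB, List.length_append, List.length_cons]
            rfl⟩
        refine ⟨hsort', hrb', hsb', hcnt',
          ⟨(if jIdx v b.rows ≤ pn then pn + 1 else pn), rfl, hposv', by
            rw [hb3, hcur]⟩,
          by simp [hal], hans', ?_, ?_⟩
        · show StackRel _ _ (rA.reverse.reverse) (rB.reverse.reverse)
          rw [List.reverse_reverse, List.reverse_reverse]
          apply hmono
          intro w hw
          rw [get?_modify, if_neg (by
            intro h
            exact hdead' w hw (h ▸ hkeymem 0 hlen0))]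
        · show DictInv (insAt b.rows (jIdx v b.rows) v)
              (a.d.modify (gv b.rows 0) (none, none) (fun u => (some v, u.2)))
          rw [hj0]
          exact dictInv_restore_head b.rows a.d v hs hnm hj0.symm hlen0 hD hvd
      · by_cases hjlen : jIdx v b.rows = b.rows.length
        · -- restored row goes above every live row
          have hlen0 : 0 < b.rows.length := by omega
          have hx : x = none := by
            rw [hxEq, hjlen, nextO_ge b.rows _ (le_refl _)]
          have hp : p = some (gv b.rows (b.rows.length - 1)) := by
            rw [hpEq, prevO, if_neg hj0, hjlen]
          rw [hp, hx] at hpopA hvd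
          have hA := stepA_Z a (some (gv b.rows (b.rows.length - 1))) v none rA.reverse
            (a.answer.set v.toNat "O") hpopA hsetA
          refine ⟨AState.mk (a.d.modify (gv b.rows (b.rows.length - 1)) (none, none)
              (fun u => (u.1, some v))) rA.reverse a.cur (a.answer.set v.toNat "O"),
            BState.mk (insAt b.rows (jIdx v b.rows) v)
              (((if jIdx v b.rows ≤ pn then pn + 1 else pn) : Nat) : Int) rB.reverse,
            hA.trans rfl, hB, ?_, by
              show rB.reverse.length + 1 = b.stack.length
              rw [hstB, List.length_append, List.length_cons]
              rfl⟩
          refine ⟨hsort', hrb', hsb', hcnt',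
            ⟨(if jIdx v b.rows ≤ pn then pn + 1 else pn), rfl, hposv', by
              rw [hb3, hcur]⟩,
            by simp [hal], hans', ?_, ?_⟩
          · show StackRel _ _ (rA.reverse.reverse) (rB.reverse.reverse)
            rw [List.reverse_reverse, List.reverse_reverse]
            apply hmono
            intro w hw
            rw [get?_modify, if_neg (by
              intro h
              exact hdead' w hw (h ▸ hkeymem (b.rows.length - 1) (by omega)))]
          · show DictInv (insAt b.rows (jIdx v b.rows) v)
                (a.d.modify (gv b.rows (b.rows.length - 1)) (none, none)
                  (fun u => (u.1, some v)))
            rw [hjlen]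
            exact dictInv_restore_last b.rows a.d v hs hnm hjlen.symm hlen0 hD hvd
        · -- restored row goes between two live rows
          have h0 : 0 < jIdx v b.rows := by omega
          have h1 : jIdx v b.rows < b.rows.length := by omega
          have hp : p = some (gv b.rows (jIdx v b.rows - 1)) := by
            rw [hpEq, prevO, if_neg hj0]
          have hx : x = some (gv b.rows (jIdx v b.rows)) := by
            rw [hxEq, nextO_lt b.rows _ h1]
          rw [hp, hx] at hpopA hvd
          have hA := stepA_Z a (some (gv b.rows (jIdx v b.rows - 1))) v
            (some (gv b.rows (jIdx v b.rows))) rA.reverse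
            (a.answer.set v.toNat "O") hpopA hsetA
          refine ⟨AState.mk
              ((a.d.modify (gv b.rows (jIdx v b.rows)) (none, none)
                  (fun u => (some v, u.2))).modify
                (gv b.rows (jIdx v b.rows - 1)) (none, none) (fun u => (u.1, some v)))
              rA.reverse a.cur (a.answer.set v.toNat "O"),
            BState.mk (insAt b.rows (jIdx v b.rows) v)
              (((if jIdx v b.rows ≤ pn then pn + 1 else pn) : Nat) : Int) rB.reverse,
            hA.trans rfl, hB, ?_, by
              show rB.reverse.length + 1 = b.stack.length
              rw [hstB, List.length_append, List.length_cons]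
              rfl⟩
          refine ⟨hsort', hrb', hsb', hcnt',
            ⟨(if jIdx v b.rows ≤ pn then pn + 1 else pn), rfl, hposv', by
              rw [hb3, hcur]⟩,
            by simp [hal], hans', ?_, ?_⟩
          · show StackRel _ _ (rA.reverse.reverse) (rB.reverse.reverse)
            rw [List.reverse_reverse, List.reverse_reverse]
            apply hmono
            intro w hw
            rw [get?_modify, if_neg (by
                intro h
                exact hdead' w hw (h ▸ hkeymem (jIdx v b.rows - 1) (by omega))),
              get?_modify, if_neg (by
                intro h
                exact hdead' w hw (h ▸ hkeymem (jIdx v b.rows) (by omega)))]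
          · exact dictInv_restore_mid b.rows a.d v (jIdx v b.rows) hs hnm rfl h0 h1 hD hvd

-- ---------- the main loop ----------
lemma runA_cons (st : AState) (s : String) (rest : List String) (st' : AState)
    (h : stepA st s = some st') : runA st (s :: rest) = runA st' rest := by
  show (match stepA st s with
        | none => none
        | some st' => runA st' rest) = _
  rw [h]

lemma runB_cons (st : BState) (s : String) (rest : List String) (st' : BState)
    (h : stepB st s = some st') : runB st (s :: rest) = runB st' rest := by
  show (match stepB st s with
        | none => none
        | some st' => runB st' rest) = _
  rw [h]

lemma run_rel (n : Int) : ∀ (cmds : List String) (a : AState) (b : BState),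
    SimRel n a b →
    validCmds ((n.toNat : Int) - (b.stack.length : Int)) ((b.stack.length : Int)) cmds = true →
    ∃ a' b', runA a cmds = some a' ∧ runB b cmds = some b' ∧ SimRel n a' b' := by
  intro cmds
  induction cmds with
  | nil => intro a b hr _; exact ⟨a, b, rfl, rfl, hr⟩
  | cons s rest ih =>
    intro a b hr hv
    by_cases hC : s = "C"
    · subst hC
      rw [validCmds, if_pos rfl] at hv
      rw [Bool.and_eq_true, decide_eq_true_eq] at hv
      obtain ⟨h2, hrest⟩ := hv
      have hlive : 2 ≤ b.rows.length := by
        have hcount := hr.count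
        omega
      obtain ⟨a', b', hA, hB, hr', hlen1⟩ := step_C n a b hr hlive
      obtain ⟨a'', b'', hA2, hB2, hr2⟩ := ih a' b' hr' (by
        rw [hlen1]
        have e1 : ((n.toNat : Int) - ((b.stack.length + 1 : Nat) : Int)) =
            (n.toNat : Int) - (b.stack.length : Int) - 1 := by push_cast; ring
        have e2 : (((b.stack.length + 1 : Nat)) : Int) = (b.stack.length : Int) + 1 := by
          push_cast; ring
        rw [e1, e2]
        exact hrest)
      exact ⟨a'', b'', by rw [runA_cons a _ _ a' hA]; exact hA2,
        by rw [runB_cons b _ _ b' hB]; exact hB2, hr2⟩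
    · by_cases hZ : s = "Z"
      · subst hZ
        rw [validCmds, if_neg (by decide), if_pos rfl] at hv
        rw [Bool.and_eq_true, decide_eq_true_eq] at hv
        obtain ⟨h1, hrest⟩ := hv
        have hne : b.stack ≠ [] := by
          intro hc
          rw [hc] at h1
          simp at h1
        obtain ⟨a', b', hA, hB, hr', hstk'⟩ := step_Z n a b hr hne
        obtain ⟨a'', b'', hA2, hB2, hr2⟩ := ih a' b' hr' (by
          have e1 : ((n.toNat : Int) - (b'.stack.length : Int)) =
              (n.toNat : Int) - (b.stack.length : Int) + 1 := by omega
          have e2 : ((b'.stack.length : Int)) = (b.stack.length : Int) - 1 := by omega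
          rw [e1, e2]
          exact hrest)
        exact ⟨a'', b'', by rw [runA_cons a _ _ a' hA]; exact hA2,
          by rw [runB_cons b _ _ b' hB]; exact hB2, hr2⟩
      · rw [validCmds, if_neg hC, if_neg hZ] at hv
        cases hsp : PySem.Str.split? s " " with
        | none => rw [hsp] at hv; exact absurd hv (by simp)
        | some l =>
          rw [hsp] at hv
          match l, hv with
          | [dir, num], hv =>
            rw [Bool.and_eq_true] at hv
            obtain ⟨hsome, hrest⟩ := hv
            obtain ⟨m, hm⟩ := Option.isSome_iff_exists.mp hsome
            obtain ⟨a', b', hA, hB, hr', hstk'⟩ :=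
              step_move n a b s dir num m hr hC hZ hsp hm
            obtain ⟨a'', b'', hA2, hB2, hr2⟩ := ih a' b' hr' (by rw [hstk']; exact hrest)
            exact ⟨a'', b'', by rw [runA_cons a _ _ a' hA]; exact hA2,
              by rw [runB_cons b _ _ b' hB]; exact hB2, hr2⟩

-- ---------- the final rendering ----------
lemma mark_spec : ∀ (stack : List Int) (res : List String),
    (∀ x ∈ stack, 0 ≤ x ∧ x < (res.length : Int)) →
    ∃ res', stack.foldl (fun acc r => acc.bind (fun l => PySem.List.pySet? l r "X")) (some res)
        = some res' ∧ res'.length = res.length ∧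
      ∀ i : Nat, i < res.length →
        res'[i]? = if (i : Int) ∈ stack then some "X" else res[i]? := by
  intro stack
  induction stack with
  | nil =>
    intro res _
    exact ⟨res, rfl, rfl, by intro i _; simp⟩
  | cons r rest ih =>
    intro res hb
    have hr := hb r List.mem_cons_self
    have hcast : ((r.toNat : Nat) : Int) = r := Int.toNat_of_nonneg hr.1
    have hlt : r.toNat < res.length := by omega
    have hset : PySem.List.pySet? res r "X" = some (res.set r.toNat "X") := by
      rw [← hcast]
      exact PySem.List.pySet?_natCast res r.toNat "X" hlt
    obtain ⟨res', h1, h2, h3⟩ := ih (res.set r.toNat "X") (by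
      intro x hx
      have := hb x (List.mem_cons_of_mem _ hx)
      simpa using this)
    refine ⟨res', ?_, by simpa using h2, ?_⟩
    · rw [List.foldl_cons]
      show rest.foldl _ ((some res).bind (fun l => PySem.List.pySet? l r "X")) = some res'
      rw [Option.bind_some, hset]
      exact h1
    · intro i hi
      rw [h3 i (by simpa using hi), List.getElem?_set]
      by_cases hmem : (i : Int) ∈ rest
      · rw [if_pos (List.mem_cons_of_mem _ hmem), if_pos hmem]
      · rw [if_neg hmem]
        by_cases hir : r.toNat = i
        · have hmemc : (i : Int) ∈ r :: rest := by
            have : (i : Int) = r := by omega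
            rw [this]
            exact List.mem_cons_self
          rw [if_pos hir, if_pos (show r.toNat < res.length by omega), if_pos hmemc]
        · rw [if_neg hir, if_neg (by
            intro hc
            rcases List.mem_cons.mp hc with h | h
            · exact hir (by omega)
            · exact hmem h)]

-- ---------- the initial states are related ----------
lemma initRel (n k : Int) (hn2 : 2 ≤ n) (hk0 : 0 ≤ k) (hkn : k < n) :
    SimRel n (AState.mk (initDict n) [] (some k) (List.replicate n.toNat "O"))
      (BState.mk (PySem.List.pyRange 0 n 1) k []) := by
  have hlen : (PySem.List.pyRange 0 n 1).length = n.toNat := by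
    rw [PySem.List.length_pyRange_one]
    congr 1
    omega
  have hgv : ∀ i : Nat, i < n.toNat → gv (PySem.List.pyRange 0 n 1) i = (i : Int) := by
    intro i hi
    rw [gv, List.getD_eq_getElem _ 0 (by rw [hlen]; exact hi), PySem.List.getElem_pyRange_one]
    omega
  refine ⟨PySem.List.pairwise_lt_pyRange_one 0 n, ?_, by simp, by simp [hlen], ?_, by simp, ?_, trivial, ?_⟩
  · intro x hx
    rw [PySem.List.mem_pyRange_one] at hx
    exact hx
  · refine ⟨k.toNat, (Int.toNat_of_nonneg hk0).symm, by rw [hlen]; omega, ?_⟩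
    show some k = some (gv (PySem.List.pyRange 0 n 1) k.toNat)
    rw [hgv k.toNat (by omega)]
    congr 1
    omega
  · intro i hi
    rw [List.getElem?_replicate, if_pos hi]
    simp
  · intro i hi
    rw [hlen] at hi
    show (initDict n).get? (gv (PySem.List.pyRange 0 n 1) i) =
      some (prevO (PySem.List.pyRange 0 n 1) i, nextO (PySem.List.pyRange 0 n 1) (i+1))
    rw [hgv i hi, initDict_get? n hn2 i (by omega)]
    congr 1
    refine Prod.ext ?_ ?_
    · show (if (i:Int) = 0 then none else some ((i:Int) - 1)) = prevO (PySem.List.pyRange 0 n 1) i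
      symm
      rw [prevO]
      cases i with
      | zero => simp
      | succ q =>
        rw [if_neg (by omega), if_neg (by omega)]
        have e : q + 1 - 1 = q := rfl
        rw [e, hgv q (by omega)]
        congr 1
        push_cast
        ring
    · show (if (i:Int) = n - 1 then none else some ((i:Int) + 1)) = nextO (PySem.List.pyRange 0 n 1) (i+1)
      symm
      rw [nextO]
      by_cases he : i + 1 < n.toNat
      · rw [List.getElem?_eq_getElem (by rw [hlen]; exact he), if_neg (by omega),
          PySem.List.getElem_pyRange_one]
        have e : (0 : Int) + ((i+1 : Nat) : Int) = (i : Int) + 1 := by push_cast; ring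
        rw [e]
      · rw [List.getElem?_eq_none (by rw [hlen]; omega), if_pos (by omega)]

-- ===== VERDICT (by name: the statement is the Claim_ definition above) =====
theorem solution_spec : Claim_equal_solution := by
  unfold Claim_equal_solution
  intro n k cmd _hdom hpre
  show solution n k cmd = solution_alt n k cmd
  rcases hpre with hnil | ⟨hn2, hk0, hkn, hval⟩
  · subst hnil
    rfl
  · have hrel0 := initRel n k hn2 hk0 hkn
    have hv0 : validCmds ((n.toNat : Int) -
        (((BState.mk (PySem.List.pyRange 0 n 1) k []).stack.length : Nat) : Int))
        (((BState.mk (PySem.List.pyRange 0 n 1) k []).stack.length : Nat) : Int) cmd = true := by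
      show validCmds ((n.toNat : Int) - (((0 : Nat)) : Int)) (((0 : Nat)) : Int) cmd = true
      have e1 : (n.toNat : Int) - (((0 : Nat)) : Int) = n := by omega
      have e2 : (((0 : Nat)) : Int) = 0 := rfl
      rw [e1, e2]
      exact hval
    obtain ⟨a', b', hA, hB, hr'⟩ := run_rel n cmd
      (AState.mk (initDict n) [] (some k) (List.replicate n.toNat "O"))
      (BState.mk (PySem.List.pyRange 0 n 1) k []) hrel0 hv0
    have hbound : ∀ x ∈ b'.stack, 0 ≤ x ∧ x < ((List.replicate n.toNat "O").length : Int) := by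
      intro x hx
      have := hr'.sbound x hx
      have hl : ((List.replicate n.toNat "O").length : Int) = n := by
        rw [List.length_replicate]
        omega
      rw [hl]
      exact this
    obtain ⟨res', hfold, hlen', hpt⟩ := mark_spec b'.stack (List.replicate n.toNat "O") hbound
    have hansEq : a'.answer = res' := by
      apply List.ext_getElem?
      intro i
      by_cases hi : i < n.toNat
      · rw [hr'.ans i hi, hpt i (by rw [List.length_replicate]; exact hi)]
        by_cases hm : (i : Int) ∈ b'.stack
        · rw [if_pos hm, if_pos hm]
        · rw [if_neg hm, if_neg hm, List.getElem?_replicate, if_pos hi]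
      · rw [List.getElem?_eq_none (by rw [hr'.anslen]; omega),
          List.getElem?_eq_none (by rw [hlen', List.length_replicate]; omega)]
    show (match runA (AState.mk (initDict n) [] (some k) (List.replicate n.toNat "O")) cmd with
          | none => ""
          | some st => PySem.Str.join "" st.answer) =
      (match runB (BState.mk (PySem.List.pyRange 0 n 1) k []) cmd with
       | none => ""
       | some st =>
         match st.stack.foldl (fun acc r => acc.bind (fun res => PySem.List.pySet? res r "X"))
             (some (List.replicate n.toNat "O")) with
         | none => ""
         | some res => PySem.Str.join "" res)
    rw [hA, hB]
    show PySem.Str.join "" a'.answer =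
      (match b'.stack.foldl (fun acc r => acc.bind (fun res => PySem.List.pySet? res r "X"))
          (some (List.replicate n.toNat "O")) with
       | none => ""
       | some res => PySem.Str.join "" res)
    rw [hfold]
    show PySem.Str.join "" a'.answer = PySem.Str.join "" res'
    rw [hansEq]
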